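-- pv_equiv track=rewrite | github.com/Lightblues/Leetcode | contest/251-300/300.py | countPaths
-- ===== SOURCE A (Python) =====
-- from typing import List, Optional, Tuple
-- from collections import deque, defaultdict, Counter, OrderedDict, namedtuple
--
-- def countPaths(grid: List[List[int]]) -> int:
--     MOD = 10**9 + 7
--     m,n = len(grid), len(grid[0])
--     key2idxs = defaultdict(list)
--     for i in range(m):
--         for j in range(n):
--             key2idxs[grid[i][j]].append((i,j))
--     cnts = [[1]*n for _ in range(m)]
--     for v in sorted(key2idxs.keys()):
--         for x,y in key2idxs[v]:
--             if x>0 and grid[x-1][y]<v: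
--                 cnts[x][y] = (cnts[x][y] + cnts[x-1][y]) % MOD
--             if y>0 and grid[x][y-1]<v:
--                 cnts[x][y] = (cnts[x][y] + cnts[x][y-1]) % MOD
--             if x<m-1 and grid[x+1][y]<v:
--                 cnts[x][y] = (cnts[x][y] + cnts[x+1][y]) % MOD
--             if y<n-1 and grid[x][y+1]<v:
--                 cnts[x][y] = (cnts[x][y] + cnts[x][y+1]) % MOD
--     return sum(sum(r) for r in cnts) % MOD
-- ===== SOURCE B (Python) =====
-- def countPaths(grid):
--     MOD = 10 ** 9 + 7
--     m, n = len(grid), len(grid[0])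
--     memo = {}
--
--     def solve(si, sj):
--         stack = [((si, sj), False)]
--         while stack:
--             (i, j), done = stack.pop()
--             if done:
--                 c = 1
--                 for x, y in ((i - 1, j), (i, j - 1), (i + 1, j), (i, j + 1)):
--                     if 0 <= x < m and 0 <= y < n and grid[x][y] > grid[i][j]:
--                         c += memo[(x, y)]
--                 memo[(i, j)] = c % MOD
--             elif (i, j) not in memo:
--                 stack.append(((i, j), True))
--                 for x, y in ((i - 1, j), (i, j - 1), (i + 1, j), (i, j + 1)):
--                     if 0 <= x < m and 0 <= y < n and grid[x][y] > grid[i][j] and (x, y) not in memo: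
--                         stack.append(((x, y), False))
--         return memo[(si, sj)]
--
--     return sum(solve(i, j) for i in range(m) for j in range(n)) % MOD
-- ===== Notes on version B (the rewrite author's own statement) =====
-- stated objective: alternative
-- what changed: A sorts the cells by value and does a bottom-up forward sweep accumulating, for each cell, the number of increasing paths ENDING there from strictly smaller neighbors; B does no sorting at all: it runs a top-down memoized depth-first search (explicit two-phase stack) computing for each cell the number of increasing paths STARTING there as 1 plus the memoized counts of its strictly larger neighbors, and sums the memo over all cells; the two per-cell quantities differ but their totals both count every strictly increasing path exactly once.
import Mathlib
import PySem

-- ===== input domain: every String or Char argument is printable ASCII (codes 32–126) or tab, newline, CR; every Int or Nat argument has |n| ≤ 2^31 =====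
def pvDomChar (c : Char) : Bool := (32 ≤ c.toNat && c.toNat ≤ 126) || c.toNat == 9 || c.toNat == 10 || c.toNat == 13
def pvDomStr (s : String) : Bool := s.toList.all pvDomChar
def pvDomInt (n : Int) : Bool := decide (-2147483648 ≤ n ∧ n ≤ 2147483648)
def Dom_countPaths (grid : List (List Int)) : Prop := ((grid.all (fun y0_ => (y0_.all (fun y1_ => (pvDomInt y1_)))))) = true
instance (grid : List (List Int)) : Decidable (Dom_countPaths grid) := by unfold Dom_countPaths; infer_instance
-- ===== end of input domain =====

-- B replaces A's sort-by-value bottom-up sweep (paths ENDING at each cell) by a top-down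
-- memoized depth-first search with an explicit two-phase stack (paths STARTING at each cell);
-- the per-cell counts differ but the totals agree (alternative algorithm, proved below).

-- ===== PORT A =====
-- shared grid accessor: grid[x][y]
def pvMatGet (c : List (List Int)) (x y : Int) : Int :=
  PySem.List.pyGetD (PySem.List.pyGetD c x []) y 0

-- shared grid accessor: grid[x][y]; exact for the in-range nonnegative indices both programs use (Pre_ below)
-- cnts[x][y] = w; exact for the in-range nonnegative x, y produced by A's ranges
def pvMatSet (c : List (List Int)) (x y : Int) (w : Int) : List (List Int) :=
  c.set x.toNat ((PySem.List.pyGetD c x []).set y.toNat w)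

def countPaths (grid : List (List Int)) : Int :=
  let MOD : Int := 10 ^ 9 + 7
  let m : Int := grid.length
  let n : Int := (PySem.List.pyGetD grid 0 []).length   -- len(grid[0]); IndexError on [] is excluded by Pre_
  let key2idxs : PySem.Dict Int (List (Int × Int)) :=
    (PySem.List.pyRange 0 m).foldl (fun d i =>
      (PySem.List.pyRange 0 n).foldl (fun d j =>
        d.modify (pvMatGet grid i j) [] (fun l => l ++ [(i, j)])) d) PySem.Dict.empty
  let cnts0 : List (List Int) := (PySem.List.pyRange 0 m).map (fun _ => PySem.List.pyRepeat [1] n)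
  let cnts1 : List (List Int) :=
    (PySem.List.sorted key2idxs.keys (fun v => v)).foldl (fun cnts v =>
      (key2idxs.getD v []).foldl (fun cnts xy =>
        let x := xy.1
        let y := xy.2
        let cnts := if 0 < x ∧ pvMatGet grid (x - 1) y < v then
            pvMatSet cnts x y (PySem.Int.mod (pvMatGet cnts x y + pvMatGet cnts (x - 1) y) MOD) else cnts
        let cnts := if 0 < y ∧ pvMatGet grid x (y - 1) < v then
            pvMatSet cnts x y (PySem.Int.mod (pvMatGet cnts x y + pvMatGet cnts x (y - 1)) MOD) else cnts
        let cnts := if x < m - 1 ∧ pvMatGet grid (x + 1) y < v then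
            pvMatSet cnts x y (PySem.Int.mod (pvMatGet cnts x y + pvMatGet cnts (x + 1) y) MOD) else cnts
        let cnts := if y < n - 1 ∧ pvMatGet grid x (y + 1) < v then
            pvMatSet cnts x y (PySem.Int.mod (pvMatGet cnts x y + pvMatGet cnts x (y + 1)) MOD) else cnts
        cnts) cnts) cnts0
  PySem.Int.mod ((cnts1.map (fun r => r.sum)).sum) MOD

-- ===== PORT B =====
-- B-side helpers: the stack machine pvLoop is the transliteration of Source B's while-loop over the
-- explicit two-phase stack; pvExpand_lt / pvRankUp_lt / pvCountP_lt / pvMem_coordsMN are cited by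
-- pvLoop's termination proof (decreasing_by).
def pvCoordsMN (m n : Int) : List (Int × Int) :=
  (PySem.List.pyRange 0 m).flatMap (fun i => (PySem.List.pyRange 0 n).map (fun j => (i, j)))

def pvRankUp (grid : List (List Int)) (m n : Int) (c : Int × Int) : Nat :=
  ((pvCoordsMN m n).filter (fun d =>
    decide (pvMatGet grid c.1 c.2 < pvMatGet grid d.1 d.2))).length

def pvNbr (c : Int × Int) : List (Int × Int) :=
  [(c.1 - 1, c.2), (c.1, c.2 - 1), (c.1 + 1, c.2), (c.1, c.2 + 1)]

def pvW (grid : List (List Int)) (m n : Int) (e : (Int × Int) × Bool) : Nat :=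
  if e.2 then 1 else 5 ^ (pvRankUp grid m n e.1 + 1)

def pvPhi (grid : List (List Int)) (m n : Int) (stack : List ((Int × Int) × Bool)) : Nat :=
  (stack.map (pvW grid m n)).sum

lemma pvCountP_lt {α : Type} (l : List α) (p q : α → Bool)
    (hpq : ∀ a ∈ l, p a = true → q a = true) (a : α) (ha : a ∈ l)
    (hqa : q a = true) (hpa : p a = false) : l.countP p < l.countP q := by
  induction l with
  | nil => cases ha
  | cons x l ih =>
    rw [List.countP_cons, List.countP_cons]
    rcases List.mem_cons.mp ha with rfl | ha'
    · have hle : l.countP p ≤ l.countP q :=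
        List.countP_mono_left (fun b hb => hpq b (List.mem_cons_of_mem _ hb))
      simp [hpa, hqa]; omega
    · have := ih (fun b hb h => hpq b (List.mem_cons_of_mem _ hb) h) ha'
      by_cases hx : p x = true
      · have := hpq x (List.mem_cons_self ..) hx
        simp [hx, this]; omega
      · simp only [Bool.not_eq_true] at hx
        simp [hx]
        by_cases hqx : q x = true <;> simp [hqx] <;> omega

lemma pvMem_coordsMN {m n : Int} {d : Int × Int} :
    d ∈ pvCoordsMN m n ↔ 0 ≤ d.1 ∧ d.1 < m ∧ 0 ≤ d.2 ∧ d.2 < n := by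
  constructor
  · intro h
    rcases List.mem_flatMap.mp h with ⟨i, hi, hd⟩
    rcases List.mem_map.mp hd with ⟨j, hj, rfl⟩
    rw [PySem.List.mem_pyRange_one] at hi hj
    exact ⟨hi.1, hi.2, hj.1, hj.2⟩
  · rintro ⟨h1, h2, h3, h4⟩
    exact List.mem_flatMap.mpr ⟨d.1, PySem.List.mem_pyRange_one.mpr ⟨h1, h2⟩,
      List.mem_map.mpr ⟨d.2, PySem.List.mem_pyRange_one.mpr ⟨h3, h4⟩, rfl⟩⟩

lemma pvRankUp_lt (grid : List (List Int)) (m n : Int) {c d : Int × Int}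
    (h1 : 0 ≤ d.1) (h2 : d.1 < m) (h3 : 0 ≤ d.2) (h4 : d.2 < n)
    (h5 : pvMatGet grid c.1 c.2 < pvMatGet grid d.1 d.2) :
    pvRankUp grid m n d < pvRankUp grid m n c := by
  unfold pvRankUp
  rw [← List.countP_eq_length_filter, ← List.countP_eq_length_filter]
  exact pvCountP_lt _ _ _
    (fun e _ he => by
      rw [decide_eq_true_iff] at he ⊢; omega)
    d (pvMem_coordsMN.mpr ⟨h1, h2, h3, h4⟩)
    (by rw [decide_eq_true_iff]; exact h5)
    (by rw [decide_eq_false_iff_not]; omega)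

lemma pvExpand_lt (grid : List (List Int)) (m n : Int) (c : Int × Int)
    (memo : PySem.Dict (Int × Int) Int) (rest : List ((Int × Int) × Bool)) :
    pvPhi grid m n
      (((((pvNbr c).filter (fun d =>
          decide (0 ≤ d.1 ∧ d.1 < m ∧ 0 ≤ d.2 ∧ d.2 < n ∧
            pvMatGet grid c.1 c.2 < pvMatGet grid d.1 d.2) && !(memo.contains d))).map
            (fun d => (d, false))).reverse ++ (c, true) :: rest))
      < pvPhi grid m n ((c, false) :: rest) := by
  set pending := (pvNbr c).filter (fun d =>
      decide (0 ≤ d.1 ∧ d.1 < m ∧ 0 ≤ d.2 ∧ d.2 < n ∧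
        pvMatGet grid c.1 c.2 < pvMatGet grid d.1 d.2) && !(memo.contains d)) with hP
  have hb : ∀ d ∈ pending, pvRankUp grid m n d < pvRankUp grid m n c := by
    intro d hd
    have hmem := List.mem_filter.mp hd
    have hg := hmem.2
    rw [Bool.and_eq_true, decide_eq_true_iff] at hg
    exact pvRankUp_lt grid m n hg.1.1 hg.1.2.1 hg.1.2.2.1 hg.1.2.2.2.1 hg.1.2.2.2.2
  have hsum : ((pending.map (fun d => pvW grid m n (d, false)))).sum
      ≤ pending.length * 5 ^ (pvRankUp grid m n c) := by
    have hh := List.sum_le_card_nsmul (pending.map (fun d => pvW grid m n (d, false)))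
      (5 ^ (pvRankUp grid m n c)) ?_
    · simpa [smul_eq_mul] using hh
    · intro x hx
      rcases List.mem_map.mp hx with ⟨d, hd, rfl⟩
      simp only [pvW, if_neg (by simp : ¬ ((d, false) : (Int × Int) × Bool).2 = true)]
      exact Nat.pow_le_pow_right (by omega) (by have := hb d hd; omega)
  have hlen4 : (pvNbr c).length = 4 := by simp [pvNbr]
  have hlen : pending.length ≤ 4 := by
    have hlf := List.length_filter_le (fun d =>
        decide (0 ≤ d.1 ∧ d.1 < m ∧ 0 ≤ d.2 ∧ d.2 < n ∧
          pvMatGet grid c.1 c.2 < pvMatGet grid d.1 d.2) && !(memo.contains d)) (pvNbr c)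
    rw [← hP] at hlf
    omega
  simp only [pvPhi, List.map_reverse, List.map_append, List.map_cons, List.sum_append,
    List.sum_reverse, List.sum_cons, List.map_map, pvW, if_pos trivial,
    if_neg (by simp : ¬ (false = true))]
  have hcomp : (List.map (pvW grid m n ∘ fun d => (d, false)) pending).sum
      = ((pending.map (fun d => pvW grid m n (d, false)))).sum := rfl
  rw [hcomp]
  have hmul : pending.length * 5 ^ pvRankUp grid m n c ≤ 4 * 5 ^ pvRankUp grid m n c :=
    Nat.mul_le_mul_right _ hlen
  rcases Decidable.eq_or_ne pending [] with hnil | hne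
  · have h1 : (0:Nat) < 5 ^ (pvRankUp grid m n c + 1) := Nat.pow_pos (by omega)
    rw [hnil]
    simp only [List.map_nil, List.sum_nil]
    omega
  · rcases List.exists_mem_of_ne_nil _ hne with ⟨d0, hd0⟩
    have hr : 1 ≤ pvRankUp grid m n c := by have := hb d0 hd0; omega
    have h5 : (5:Nat) ^ 1 ≤ 5 ^ (pvRankUp grid m n c) := Nat.pow_le_pow_right (by omega) hr
    have hstep : 5 ^ (pvRankUp grid m n c + 1) = 5 * 5 ^ (pvRankUp grid m n c) := by
      rw [pow_succ]; ring
    omega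

def pvLoop (grid : List (List Int)) (m n : Int) :
    List ((Int × Int) × Bool) → PySem.Dict (Int × Int) Int → PySem.Dict (Int × Int) Int
  | [], memo => memo
  | ((c, true) :: rest), memo =>
      let v := (pvNbr c).foldl (fun a d =>
        if 0 ≤ d.1 ∧ d.1 < m ∧ 0 ≤ d.2 ∧ d.2 < n ∧
            pvMatGet grid c.1 c.2 < pvMatGet grid d.1 d.2 then
          a + memo.getD d 0
        else a) 1
      pvLoop grid m n rest (memo.insert c (PySem.Int.mod v 1000000007))
  | ((c, false) :: rest), memo =>
      if memo.contains c then pvLoop grid m n rest memo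
      else
        pvLoop grid m n
          ((((pvNbr c).filter (fun d =>
              decide (0 ≤ d.1 ∧ d.1 < m ∧ 0 ≤ d.2 ∧ d.2 < n ∧
                pvMatGet grid c.1 c.2 < pvMatGet grid d.1 d.2) && !(memo.contains d))).map
              (fun d => (d, false))).reverse ++ (c, true) :: rest) memo
  termination_by stack _ => pvPhi grid m n stack
  decreasing_by
  · simp only [pvPhi, List.map_cons, List.sum_cons, pvW]
    simp
  · simp only [pvPhi, List.map_cons, List.sum_cons, pvW]
    simp
  · exact pvExpand_lt grid m n c memo rest
def countPaths_alt (grid : List (List Int)) : Int :=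
  let MOD : Int := 10 ^ 9 + 7
  let m : Int := grid.length
  let n : Int := (PySem.List.pyGetD grid 0 []).length   -- len(grid[0]); IndexError on [] is excluded by Pre_
  let res :=
    (PySem.List.pyRange 0 m).foldl (fun st i =>
      (PySem.List.pyRange 0 n).foldl (fun st j =>
        let memo := pvLoop grid m n [((i, j), false)] st.1   -- solve(i, j)
        (memo, st.2 + memo.getD (i, j) 0)) st)   -- memo[(si,sj)]; present after solve (proved below)
      ((PySem.Dict.empty : PySem.Dict (Int × Int) Int), (0 : Int))
  PySem.Int.mod res.2 MOD

-- ===== PRECONDITION & SPEC =====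
-- Pre_ excludes exactly the inputs on which BOTH programs raise IndexError: the empty grid
-- (grid[0]) and grids with a row shorter than the first row (grid[i][j] for j < len(grid[0])).
def Pre_countPaths (grid : List (List Int)) : Prop :=
  grid ≠ [] ∧ ∀ row ∈ grid, (PySem.List.pyGetD grid 0 []).length ≤ row.length
instance (grid : List (List Int)) : Decidable (Pre_countPaths grid) := by
  unfold Pre_countPaths; infer_instance

def pvWitness_countPaths : List (List Int) := [[1, 2], [3, 4]]

def Spec_countPaths (grid : List (List Int)) (out : Int) : Prop := out = countPaths_alt grid
instance (grid : List (List Int)) (out : Int) : Decidable (Spec_countPaths grid out) := by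
  unfold Spec_countPaths; infer_instance

-- ===== CLAIM (what is proved, stated in full; the proofs are below) =====
def Claim_equal_countPaths : Prop :=
  ∀ (grid : List (List Int)), Dom_countPaths grid → Pre_countPaths grid →
    Spec_countPaths grid (countPaths grid)

-- ===== LEMMAS AND PROOFS =====

-- ---------- shared coordinate facts ----------
def pvM (grid : List (List Int)) : Int := grid.length
def pvN (grid : List (List Int)) : Int := (PySem.List.pyGetD grid 0 []).length

def pvCells (grid : List (List Int)) : List (Int × (Int × Int)) :=
  (PySem.List.pyRange 0 (pvM grid)).flatMap (fun i =>
    (PySem.List.pyRange 0 (pvN grid)).map (fun j => (pvMatGet grid i j, (i, j))))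

def pvT (grid : List (List Int)) : List (Int × (Int × Int)) :=
  PySem.List.sorted (pvCells grid) (fun t => t.1)

lemma pvNbr_nodup (c : Int × Int) : (pvNbr c).Nodup := by
  simp [pvNbr, Prod.ext_iff]
  omega

lemma pvNbr_comm (c d : Int × Int) : d ∈ pvNbr c ↔ c ∈ pvNbr d := by
  simp only [pvNbr, List.mem_cons, List.not_mem_nil, or_false, Prod.ext_iff]
  constructor <;> intro h <;>
    [skip; skip] <;>
    · rcases h with h | h | h | h <;>
        [exact Or.inr (Or.inr (Or.inl (by omega)));
         exact Or.inr (Or.inr (Or.inr (by omega)));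
         exact Or.inl (by omega);
         exact Or.inr (Or.inl (by omega))]

lemma pvCoordsMN_nodup (m n : Int) : (pvCoordsMN m n).Nodup := by
  rw [pvCoordsMN]
  apply List.pairwise_flatMap.mpr
  constructor
  · intro i _
    exact (PySem.List.nodup_pyRange_one 0 n).map
      (fun a b h => by
        have := congrArg Prod.snd h
        simpa using this)
  · apply (PySem.List.pairwise_lt_pyRange_one 0 m).imp
    intro i1 i2 h12 p hp q hq
    rcases List.mem_map.mp hp with ⟨j1, _, rfl⟩
    rcases List.mem_map.mp hq with ⟨j2, _, rfl⟩
    intro heq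
    have := congrArg Prod.fst heq
    simp at this
    omega

-- ---------- generic fold-to-filtered-sum lemma ----------
lemma pvFoldl_filter {α : Type} (p : α → Prop) [DecidablePred p] (f : α → Int) :
    ∀ (l : List α) (s : Int),
      l.foldl (fun a d => if p d then a + f d else a) s
        = s + ((l.filter (fun d => decide (p d))).map f).sum := by
  intro l
  induction l with
  | nil => intro s; simp
  | cons x l ih =>
    intro s
    rw [List.foldl_cons]
    by_cases hx : p x
    · rw [if_pos hx, ih, List.filter_cons_of_pos (by simpa using hx)]
      simp
      omega
    · rw [if_neg hx, ih, List.filter_cons_of_neg (by simpa using hx)]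

-- ---------- the two recursively-characterised per-cell counts ----------
def pvRankDown (grid : List (List Int)) (m n : Int) (c : Int × Int) : Nat :=
  ((pvCoordsMN m n).filter (fun d =>
    decide (pvMatGet grid d.1 d.2 < pvMatGet grid c.1 c.2))).length

lemma pvRankDown_lt (grid : List (List Int)) (m n : Int) {c d : Int × Int}
    (h1 : 0 ≤ d.1) (h2 : d.1 < m) (h3 : 0 ≤ d.2) (h4 : d.2 < n)
    (h5 : pvMatGet grid d.1 d.2 < pvMatGet grid c.1 c.2) :
    pvRankDown grid m n d < pvRankDown grid m n c := by
  unfold pvRankDown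
  rw [← List.countP_eq_length_filter, ← List.countP_eq_length_filter]
  exact pvCountP_lt _ _ _
    (fun e _ he => by rw [decide_eq_true_iff] at he ⊢; omega)
    d (pvMem_coordsMN.mpr ⟨h1, h2, h3, h4⟩)
    (by rw [decide_eq_true_iff]; exact h5)
    (by rw [decide_eq_false_iff_not]; omega)

-- pvF c = A's per-cell count: number (mod p) of strictly increasing paths ENDING at c
def pvF (grid : List (List Int)) (m n : Int) (c : Int × Int) : Int :=
  let d1 := (c.1 - 1, c.2)
  let d2 := (c.1, c.2 - 1)
  let d3 := (c.1 + 1, c.2)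
  let d4 := (c.1, c.2 + 1)
  let a : Int := 1
  let a := if h : 0 ≤ d1.1 ∧ d1.1 < m ∧ 0 ≤ d1.2 ∧ d1.2 < n ∧
      pvMatGet grid d1.1 d1.2 < pvMatGet grid c.1 c.2 then a + pvF grid m n d1 else a
  let a := if h : 0 ≤ d2.1 ∧ d2.1 < m ∧ 0 ≤ d2.2 ∧ d2.2 < n ∧
      pvMatGet grid d2.1 d2.2 < pvMatGet grid c.1 c.2 then a + pvF grid m n d2 else a
  let a := if h : 0 ≤ d3.1 ∧ d3.1 < m ∧ 0 ≤ d3.2 ∧ d3.2 < n ∧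
      pvMatGet grid d3.1 d3.2 < pvMatGet grid c.1 c.2 then a + pvF grid m n d3 else a
  let a := if h : 0 ≤ d4.1 ∧ d4.1 < m ∧ 0 ≤ d4.2 ∧ d4.2 < n ∧
      pvMatGet grid d4.1 d4.2 < pvMatGet grid c.1 c.2 then a + pvF grid m n d4 else a
  PySem.Int.mod a 1000000007
  termination_by pvRankDown grid m n c
  decreasing_by
  all_goals exact pvRankDown_lt grid m n h.1 h.2.1 h.2.2.1 h.2.2.2.1 h.2.2.2.2

-- pvG c = B's per-cell count: number (mod p) of strictly increasing paths STARTING at c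
def pvG (grid : List (List Int)) (m n : Int) (c : Int × Int) : Int :=
  let d1 := (c.1 - 1, c.2)
  let d2 := (c.1, c.2 - 1)
  let d3 := (c.1 + 1, c.2)
  let d4 := (c.1, c.2 + 1)
  let a : Int := 1
  let a := if h : 0 ≤ d1.1 ∧ d1.1 < m ∧ 0 ≤ d1.2 ∧ d1.2 < n ∧
      pvMatGet grid c.1 c.2 < pvMatGet grid d1.1 d1.2 then a + pvG grid m n d1 else a
  let a := if h : 0 ≤ d2.1 ∧ d2.1 < m ∧ 0 ≤ d2.2 ∧ d2.2 < n ∧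
      pvMatGet grid c.1 c.2 < pvMatGet grid d2.1 d2.2 then a + pvG grid m n d2 else a
  let a := if h : 0 ≤ d3.1 ∧ d3.1 < m ∧ 0 ≤ d3.2 ∧ d3.2 < n ∧
      pvMatGet grid c.1 c.2 < pvMatGet grid d3.1 d3.2 then a + pvG grid m n d3 else a
  let a := if h : 0 ≤ d4.1 ∧ d4.1 < m ∧ 0 ≤ d4.2 ∧ d4.2 < n ∧
      pvMatGet grid c.1 c.2 < pvMatGet grid d4.1 d4.2 then a + pvG grid m n d4 else a
  PySem.Int.mod a 1000000007
  termination_by pvRankUp grid m n c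
  decreasing_by
  all_goals exact pvRankUp_lt grid m n h.1 h.2.1 h.2.2.1 h.2.2.2.1 h.2.2.2.2

def pvDownL (grid : List (List Int)) (m n : Int) (c : Int × Int) : List (Int × Int) :=
  (pvNbr c).filter (fun d =>
    decide (0 ≤ d.1 ∧ d.1 < m ∧ 0 ≤ d.2 ∧ d.2 < n ∧
      pvMatGet grid d.1 d.2 < pvMatGet grid c.1 c.2))

def pvUpL (grid : List (List Int)) (m n : Int) (c : Int × Int) : List (Int × Int) :=
  (pvNbr c).filter (fun d =>
    decide (0 ≤ d.1 ∧ d.1 < m ∧ 0 ≤ d.2 ∧ d.2 < n ∧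
      pvMatGet grid c.1 c.2 < pvMatGet grid d.1 d.2))

lemma pvDite_add (P : Prop) [Decidable P] (a x : Int) :
    (dite P (fun _ => a + x) (fun _ => a)) = a + (if P then x else 0) := by
  split_ifs <;> simp

lemma pvFilter4_sum {α : Type} (q : α → Prop) [DecidablePred q] (f : α → Int) (d1 d2 d3 d4 : α) :
    (([d1, d2, d3, d4].filter (fun d => decide (q d))).map f).sum
      = (if q d1 then f d1 else 0) + ((if q d2 then f d2 else 0) +
          ((if q d3 then f d3 else 0) + (if q d4 then f d4 else 0))) := by
  by_cases h1 : q d1 <;> by_cases h2 : q d2 <;> by_cases h3 : q d3 <;> by_cases h4 : q d4 <;>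
    simp [h1, h2, h3, h4]

lemma pvF_eq (grid : List (List Int)) (m n : Int) (c : Int × Int) :
    pvF grid m n c =
      PySem.Int.mod (1 + ((pvDownL grid m n c).map (pvF grid m n)).sum) 1000000007 := by
  conv_lhs => rw [pvF]
  rw [pvDownL, pvNbr]
  dsimp only
  rw [pvFilter4_sum]
  simp only [pvDite_add]
  congr 1
  omega

lemma pvG_eq (grid : List (List Int)) (m n : Int) (c : Int × Int) :
    pvG grid m n c =
      PySem.Int.mod (1 + ((pvUpL grid m n c).map (pvG grid m n)).sum) 1000000007 := by
  conv_lhs => rw [pvG]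
  rw [pvUpL, pvNbr]
  dsimp only
  rw [pvFilter4_sum]
  simp only [pvDite_add]
  congr 1
  omega

-- ---------- A-side machinery (sorted sweep → dictionary fold → pvF) ----------
def pvStepA (grid : List (List Int)) (cnts : List (List Int)) (e : Int × (Int × Int)) :
    List (List Int) :=
  let v := e.1
  let x := e.2.1
  let y := e.2.2
  let cnts := if 0 < x ∧ pvMatGet grid (x - 1) y < v then
      pvMatSet cnts x y (PySem.Int.mod (pvMatGet cnts x y + pvMatGet cnts (x - 1) y) 1000000007) else cnts
  let cnts := if 0 < y ∧ pvMatGet grid x (y - 1) < v then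
      pvMatSet cnts x y (PySem.Int.mod (pvMatGet cnts x y + pvMatGet cnts x (y - 1)) 1000000007) else cnts
  let cnts := if x < pvM grid - 1 ∧ pvMatGet grid (x + 1) y < v then
      pvMatSet cnts x y (PySem.Int.mod (pvMatGet cnts x y + pvMatGet cnts (x + 1) y) 1000000007) else cnts
  let cnts := if y < pvN grid - 1 ∧ pvMatGet grid x (y + 1) < v then
      pvMatSet cnts x y (PySem.Int.mod (pvMatGet cnts x y + pvMatGet cnts x (y + 1)) 1000000007) else cnts
  cnts

def pvStepD (grid : List (List Int)) (cnt : PySem.Dict (Int × Int) Int) (e : Int × (Int × Int)) :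
    PySem.Dict (Int × Int) Int :=
  let v := e.1
  let i := e.2.1
  let j := e.2.2
  let c := [(i - 1, j), (i, j - 1), (i + 1, j), (i, j + 1)].foldl (fun c xy =>
    if 0 ≤ xy.1 ∧ xy.1 < pvM grid ∧ 0 ≤ xy.2 ∧ xy.2 < pvN grid ∧ pvMatGet grid xy.1 xy.2 < v then
      c + cnt.getD xy 0
    else c) 1
  cnt.insert (i, j) (PySem.Int.mod c 1000000007)

def pvMk (m n : Int) (F : Int → Int → Int) : List (List Int) :=
  (PySem.List.pyRange 0 m).map (fun i => (PySem.List.pyRange 0 n).map (fun j => F i j))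

lemma pvFilter_insertBy {α : Type} (key : α → Int) (v : Int) (x : α) (ys : List α)
    (h : ys.Pairwise (fun a b => key a ≤ key b)) :
    (PySem.List.insertBy (fun a b => decide (key a < key b)) x ys).filter (fun y => key y == v) =
      if key x == v then ys.filter (fun y => key y == v) ++ [x]
      else ys.filter (fun y => key y == v) := by
  induction ys with
  | nil =>
    by_cases hv : key x = v <;> simp [PySem.List.insertBy, List.filter, hv]
  | cons y ys ih =>
    rw [List.pairwise_cons] at h
    simp only [PySem.List.insertBy]
    by_cases hlt : key x < key y
    · simp only [hlt, decide_true, if_true]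
      by_cases hv : key x = v
      · have h1 : ∀ z ∈ y :: ys, ¬ (key z == v) = true := by
          intro z hz
          have hyz : key y ≤ key z := by
            rcases List.mem_cons.mp hz with rfl | hz'
            · exact le_refl _
            · exact h.1 _ hz'
          simp only [beq_iff_eq]; omega
        rw [List.filter_cons_of_pos (by simp [hv]), List.filter_eq_nil_iff.2 h1]
        simp [hv]
      · simp [List.filter_cons, hv, beq_iff_eq]
    · simp only [hlt, decide_false, Bool.false_eq_true, if_false]
      rw [List.filter_cons, List.filter_cons, ih h.2]
      by_cases hyv : key y = v <;> by_cases hxv : key x = v <;>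
        simp [hyv, hxv, beq_iff_eq]

lemma pvFilter_sorted {α : Type} (key : α → Int) (l : List α) (v : Int) :
    (PySem.List.sorted l key).filter (fun y => key y == v) = l.filter (fun y => key y == v) := by
  induction l using List.reverseRecOn with
  | nil => simp [PySem.List.sorted]
  | append_singleton l x ih =>
    have hs : PySem.List.sorted (l ++ [x]) key =
        PySem.List.insertBy (fun a b => decide (key a < key b)) x (PySem.List.sorted l key) := by
      rw [PySem.List.sorted_eq_foldl_insertBy, PySem.List.sorted_eq_foldl_insertBy, List.foldl_append]
      rfl
    rw [hs, pvFilter_insertBy key v x _ (PySem.List.sorted_pairwise l key), ih, List.filter_append]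
    have hbv : ∀ b : Bool, (key x == v) = b → (List.filter (fun y => key y == v) [x] = if b then [x] else []) := by
      intro b hb; simp [List.filter, hb]; cases b <;> rfl
    by_cases hv : key x = v
    · rw [hbv true (by simp [hv])]; simp [hv]
    · rw [hbv false (by simp [hv])]; simp [hv]

lemma pvEq_of_pairwise_of_filter {α : Type} (key : α → Int) :
    ∀ (xs ys : List α), xs.Pairwise (fun a b => key a ≤ key b) →
    ys.Pairwise (fun a b => key a ≤ key b) →
    (∀ v, xs.filter (fun y => key y == v) = ys.filter (fun y => key y == v)) →
    xs = ys := by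
  intro xs
  induction xs with
  | nil =>
    intro ys _ _ hf
    cases ys with
    | nil => rfl
    | cons b ys =>
      have := hf (key b)
      simp at this
  | cons a xs ih =>
    intro ys hx hy hf
    cases ys with
    | nil =>
      have := hf (key a)
      simp at this
    | cons b ys =>
      rw [List.pairwise_cons] at hx hy
      have hne1 : ((b :: ys).filter (fun y => key y == key a)) ≠ [] := by
        intro hnil
        have h0 := hf (key a)
        rw [hnil, List.filter_cons_of_pos (by simp)] at h0
        exact List.cons_ne_nil _ _ h0
      have hba : key b ≤ key a := by
        rcases List.exists_mem_of_ne_nil _ hne1 with ⟨z, hz⟩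
        rcases List.mem_filter.mp hz with ⟨hzmem, hzkey⟩
        have hzk : key z = key a := by simpa using hzkey
        rcases List.mem_cons.mp hzmem with rfl | hz'
        · omega
        · have := hy.1 _ hz'; omega
      have hne2 : ((a :: xs).filter (fun y => key y == key b)) ≠ [] := by
        intro hnil
        have h0 := hf (key b)
        rw [hnil, List.filter_cons_of_pos (by simp)] at h0
        exact List.cons_ne_nil _ _ h0.symm
      have hab : key a = key b := by
        rcases List.exists_mem_of_ne_nil _ hne2 with ⟨z, hz⟩
        rcases List.mem_filter.mp hz with ⟨hzmem, hzkey⟩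
        have hzk : key z = key b := by simpa using hzkey
        rcases List.mem_cons.mp hzmem with rfl | hz'
        · omega
        · have := hx.1 _ hz'; omega
      have hfa := hf (key a)
      rw [List.filter_cons_of_pos (by simp), List.filter_cons_of_pos (by simp [hab])] at hfa
      have hhead : a = b := List.head_eq_of_cons_eq hfa
      have htail := List.tail_eq_of_cons_eq hfa
      subst hhead
      refine congrArg (a :: ·) (ih ys hx.2 hy.2 ?_)
      intro v
      by_cases hv : v = key a
      · subst hv; exact htail
      · have h0 := hf v
        rw [List.filter_cons_of_neg (by simp [Ne.symm hv]),
            List.filter_cons_of_neg (by simp [hab ▸ Ne.symm hv])] at h0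
        exact h0

lemma pvFlatMap_ite {α : Type} (B : Int → List α) (v : Int) :
    ∀ vs : List Int, vs.Nodup →
      vs.flatMap (fun w => if w = v then B v else []) = if v ∈ vs then B v else [] := by
  intro vs
  induction vs with
  | nil => simp
  | cons w vs ih =>
    intro hnd
    rw [List.nodup_cons] at hnd
    rw [List.flatMap_cons, ih hnd.2]
    by_cases hwv : w = v
    · subst hwv
      simp [hnd.1]
    · simp [hwv, List.mem_cons, Ne.symm hwv]

lemma pvL {α : Type} (key : α → Int) (l : List α) :
    PySem.List.sorted l key =
      (PySem.List.sorted (PySem.Set.ofList (l.map key)) (fun v => v)).flatMap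
        (fun v => l.filter (fun x => key x == v)) := by
  have hvals := PySem.List.sorted_ofList_pairwise_lt (l.map key)
  set vs := PySem.List.sorted (PySem.Set.ofList (l.map key)) (fun v => v) with hvs
  have hnd : vs.Nodup := hvals.imp (fun h => ne_of_lt h)
  have hmemvs : ∀ v, v ∈ vs ↔ v ∈ l.map key := by
    intro v
    rw [hvs, PySem.List.mem_sorted, PySem.Set.mem_ofList]
  apply pvEq_of_pairwise_of_filter key
  · exact PySem.List.sorted_pairwise l key
  · rw [List.pairwise_flatMap]
    constructor
    · intro v _
      apply List.pairwise_of_forall_mem_list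
      intro a ha b hb
      have h1 : key a = v := by simpa using (List.mem_filter.mp ha).2
      have h2 : key b = v := by simpa using (List.mem_filter.mp hb).2
      omega
    · refine hvals.imp ?_
      intro v w hvw x hx y hy
      have h1 : key x = v := by simpa using (List.mem_filter.mp hx).2
      have h2 : key y = w := by simpa using (List.mem_filter.mp hy).2
      omega
  · intro u
    rw [pvFilter_sorted, List.filter_flatMap]
    have hinner : ∀ w, (l.filter (fun x => key x == w)).filter (fun x => key x == u) =
        if w = u then l.filter (fun x => key x == u) else [] := by
      intro w
      rw [List.filter_filter]
      by_cases hwu : w = u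
      · subst hwu
        simp [Bool.and_self]
      · rw [if_neg hwu]
        apply List.filter_eq_nil_iff.2
        intro a _
        simp only [Bool.and_eq_true, beq_iff_eq]
        rintro ⟨h1, h2⟩
        exact hwu (h2.symm.trans h1)
    rw [show (fun w => List.filter (fun y => key y == u) (List.filter (fun x => key x == w) l))
          = (fun w => if w = u then l.filter (fun x => key x == u) else []) from funext hinner]
    rw [pvFlatMap_ite (fun v => l.filter (fun x => key x == v)) u vs hnd]
    by_cases hu : u ∈ l.map key
    · rw [if_pos ((hmemvs u).2 hu)]
    · rw [if_neg (fun h => hu ((hmemvs u).1 h))]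
      apply List.filter_eq_nil_iff.2
      intro a ha
      simp only [beq_iff_eq]
      intro hk
      exact hu (hk ▸ List.mem_map_of_mem ha)

lemma pvCnts0 (grid : List (List Int)) :
    ((PySem.List.pyRange 0 (pvM grid)).map (fun _ => PySem.List.pyRepeat [1] (pvN grid))) =
      pvMk (pvM grid) (pvN grid) (fun _ _ => (1 : Int)) := by
  apply List.map_congr_left
  intro i _
  rw [PySem.List.pyRepeat_singleton, List.map_const']
  simp [PySem.List.length_pyRange_one]

lemma pvDict_eq (grid : List (List Int)) :
    ((PySem.List.pyRange 0 (pvM grid)).foldl (fun d i =>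
        (PySem.List.pyRange 0 (pvN grid)).foldl (fun d j =>
          d.modify (pvMatGet grid i j) [] (fun l => l ++ [(i, j)])) d) PySem.Dict.empty) =
      (pvCells grid).foldl (fun d p => d.modify p.1 [] (fun l => l ++ [p.2])) PySem.Dict.empty := by
  rw [pvCells, List.foldl_flatMap]
  apply PySem.List.foldl_congr_mem
  intro d i _
  rw [List.foldl_map]

lemma pvA_norm (grid : List (List Int)) :
    countPaths grid =
      PySem.Int.mod ((((pvT grid).foldl (pvStepA grid)
        (pvMk (pvM grid) (pvN grid) (fun _ _ => 1))).map (fun r => r.sum)).sum) 1000000007 := by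
  have hm : pvM grid = grid.length := rfl
  have hn : pvN grid = (PySem.List.pyGetD grid 0 []).length := rfl
  simp only [countPaths]
  rw [← hm, ← hn, show (10:Int)^9+7 = 1000000007 from by norm_num]
  rw [pvDict_eq]
  rw [PySem.Dict.keys_foldl_modify_key (pvCells grid) (fun p => p.1) []
        (fun d p => fun l => l ++ [p.2]) PySem.Dict.empty]
  simp only [PySem.Dict.getD_foldl_modify_append, PySem.Dict.getD_empty, List.nil_append,
    PySem.Dict.keys_empty, PySem.Set.update_nil_left, List.foldl_map]
  rw [pvCnts0]
  have houter : ∀ (acc : List (List Int)) v,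
      v ∈ PySem.List.sorted (PySem.Set.ofList ((pvCells grid).map (fun p => p.1))) (fun v => v) →
      ((pvCells grid).filter (fun p => p.1 == v)).foldl
        (fun cnts p =>
          let x := p.2.1
          let y := p.2.2
          let cnts := if 0 < x ∧ pvMatGet grid (x - 1) y < v then
              pvMatSet cnts x y (PySem.Int.mod (pvMatGet cnts x y + pvMatGet cnts (x - 1) y) 1000000007) else cnts
          let cnts := if 0 < y ∧ pvMatGet grid x (y - 1) < v then
              pvMatSet cnts x y (PySem.Int.mod (pvMatGet cnts x y + pvMatGet cnts x (y - 1)) 1000000007) else cnts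
          let cnts := if x < pvM grid - 1 ∧ pvMatGet grid (x + 1) y < v then
              pvMatSet cnts x y (PySem.Int.mod (pvMatGet cnts x y + pvMatGet cnts (x + 1) y) 1000000007) else cnts
          let cnts := if y < pvN grid - 1 ∧ pvMatGet grid x (y + 1) < v then
              pvMatSet cnts x y (PySem.Int.mod (pvMatGet cnts x y + pvMatGet cnts x (y + 1)) 1000000007) else cnts
          cnts) acc =
      ((pvCells grid).filter (fun p => p.1 == v)).foldl (pvStepA grid) acc := by
    intro acc v _
    apply PySem.List.foldl_congr_mem
    intro c p hp
    have hpv : p.1 = v := by simpa using (List.mem_filter.mp hp).2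
    simp only [pvStepA, hpv]
  rw [PySem.List.foldl_congr_mem _ _ _ _ houter, ← List.foldl_flatMap, ← pvL]
  rfl

def pvUpd (F : Int → Int → Int) (x y a : Int) : Int → Int → Int :=
  fun i j => if i = x ∧ j = y then a else F i j

lemma pvUpd_self (F : Int → Int → Int) (x y a : Int) : pvUpd F x y a x y = a := by
  simp [pvUpd]

lemma pvUpd_other (F : Int → Int → Int) (x y a : Int) {x' y' : Int}
    (h : ¬(x' = x ∧ y' = y)) : pvUpd F x y a x' y' = F x' y' := by
  simp only [pvUpd, if_neg h]

lemma pvMk_row (m n : Int) (F : Int → Int → Int) {x : Int} (h0 : 0 ≤ x) (h1 : x < m) :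
    PySem.List.pyGetD (pvMk m n F) x [] = (PySem.List.pyRange 0 n).map (fun j => F x j) := by
  have hlen : x < ((pvMk m n F).length : Int) := by
    simp only [pvMk, List.length_map, PySem.List.length_pyRange_one]; omega
  rw [PySem.List.pyGetD_eq_getElem _ _ h0 hlen]
  simp only [pvMk, List.getElem_map, PySem.List.getElem_pyRange_one]
  rw [show (0:Int) + (x.toNat : Int) = x from by omega]

lemma pvMk_get (m n : Int) (F : Int → Int → Int) {x y : Int}
    (h0 : 0 ≤ x) (h1 : x < m) (h2 : 0 ≤ y) (_h3 : y < n) :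
    pvMatGet (pvMk m n F) x y = F x y := by
  rw [pvMatGet, pvMk_row m n F h0 h1]
  have hlen : y < (((PySem.List.pyRange 0 n).map (fun j => F x j)).length : Int) := by
    simp [PySem.List.length_pyRange_one]; omega
  rw [PySem.List.pyGetD_eq_getElem _ _ h2 hlen]
  simp only [List.getElem_map, PySem.List.getElem_pyRange_one]
  rw [show (0:Int) + (y.toNat : Int) = y from by omega]

lemma pvMk_set (m n : Int) (F : Int → Int → Int) {x y : Int} (w : Int)
    (h0 : 0 ≤ x) (h1 : x < m) (h2 : 0 ≤ y) (_h3 : y < n) :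
    pvMatSet (pvMk m n F) x y w = pvMk m n (pvUpd F x y w) := by
  rw [pvMatSet, pvMk_row m n F h0 h1]
  apply List.ext_getElem
  · simp [pvMk]
  · intro k hk hk'
    simp only [pvMk, List.getElem_set, List.getElem_map, PySem.List.getElem_pyRange_one]
    by_cases hkx : x.toNat = k
    · rw [if_pos hkx]
      apply List.ext_getElem
      · simp
      · intro l hl hl'
        simp only [List.getElem_set, List.getElem_map, PySem.List.getElem_pyRange_one]
        have hxk : (0 : Int) + (k : Int) = x := by omega
        rw [hxk]
        by_cases hly : y.toNat = l
        · rw [if_pos hly, pvUpd, if_pos ⟨rfl, by omega⟩]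
        · rw [if_neg hly, pvUpd, if_neg (by rintro ⟨hh1, hh2⟩; omega)]
    · rw [if_neg hkx]
      apply List.map_congr_left
      intro j _
      rw [pvUpd, if_neg (by rintro ⟨hh1, hh2⟩; omega)]

lemma pvMk_congr (m n : Int) (F G : Int → Int → Int)
    (h : ∀ i j, 0 ≤ i → i < m → 0 ≤ j → j < n → F i j = G i j) :
    pvMk m n F = pvMk m n G := by
  apply List.map_congr_left
  intro i hi
  apply List.map_congr_left
  intro j hj
  rw [PySem.List.mem_pyRange_one] at hi hj
  exact h i j hi.1 hi.2 hj.1 hj.2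

def pvAVal (grid : List (List Int)) (F : Int → Int → Int) (e : Int × (Int × Int)) : Int :=
  let v := e.1
  let x := e.2.1
  let y := e.2.2
  let a := F x y
  let a := if 0 < x ∧ pvMatGet grid (x - 1) y < v then PySem.Int.mod (a + F (x - 1) y) 1000000007 else a
  let a := if 0 < y ∧ pvMatGet grid x (y - 1) < v then PySem.Int.mod (a + F x (y - 1)) 1000000007 else a
  let a := if x < pvM grid - 1 ∧ pvMatGet grid (x + 1) y < v then PySem.Int.mod (a + F (x + 1) y) 1000000007 else a
  let a := if y < pvN grid - 1 ∧ pvMatGet grid x (y + 1) < v then PySem.Int.mod (a + F x (y + 1)) 1000000007 else a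
  a

lemma pvUpd1 {m n : Int} (F : Int → Int → Int) {x y a : Int}
    (hx0 : 0 ≤ x) (hx1 : x < m) (hy0 : 0 ≤ y) (hy1 : y < n)
    (b : Prop) [Decidable b] {x' y' : Int}
    (hnbr : b → (0 ≤ x' ∧ x' < m ∧ 0 ≤ y' ∧ y' < n ∧ ¬(x' = x ∧ y' = y))) :
    (if b then
        pvMatSet (pvMk m n (pvUpd F x y a)) x y
          (PySem.Int.mod (pvMatGet (pvMk m n (pvUpd F x y a)) x y +
            pvMatGet (pvMk m n (pvUpd F x y a)) x' y') 1000000007)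
      else pvMk m n (pvUpd F x y a)) =
      pvMk m n (pvUpd F x y (if b then PySem.Int.mod (a + F x' y') 1000000007 else a)) := by
  by_cases hb : b
  · rcases hnbr hb with ⟨h1, h2, h3, h4, h5⟩
    rw [if_pos hb, if_pos hb]
    rw [pvMk_get m n _ hx0 hx1 hy0 hy1, pvMk_get m n _ h1 h2 h3 h4]
    rw [pvUpd_self, pvUpd_other F x y a h5]
    rw [pvMk_set m n _ _ hx0 hx1 hy0 hy1]
    apply pvMk_congr
    intro i j _ _ _ _
    simp only [pvUpd]
    by_cases hij : i = x ∧ j = y <;> simp [hij]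
  · rw [if_neg hb, if_neg hb]

lemma pvStepA_mk (grid : List (List Int)) (F : Int → Int → Int) (e : Int × (Int × Int))
    (hx0 : 0 ≤ e.2.1) (hx1 : e.2.1 < pvM grid) (hy0 : 0 ≤ e.2.2) (hy1 : e.2.2 < pvN grid) :
    pvStepA grid (pvMk (pvM grid) (pvN grid) F) e =
      pvMk (pvM grid) (pvN grid) (pvUpd F e.2.1 e.2.2 (pvAVal grid F e)) := by
  obtain ⟨v, x, y⟩ := e
  dsimp only at hx0 hx1 hy0 hy1 ⊢
  simp only [pvStepA, pvAVal]
  have hstart : pvMk (pvM grid) (pvN grid) F =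
      pvMk (pvM grid) (pvN grid) (pvUpd F x y (F x y)) := by
    apply pvMk_congr
    intro i j _ _ _ _
    simp only [pvUpd]
    by_cases hij : i = x ∧ j = y
    · rcases hij with ⟨rfl, rfl⟩; simp
    · rw [if_neg hij]
  rw [hstart]
  rw [pvUpd1 F hx0 hx1 hy0 hy1 _ (fun hb => ⟨by omega, by omega, hy0, hy1, by rintro ⟨hh, _⟩; omega⟩)]
  rw [pvUpd1 F hx0 hx1 hy0 hy1 _ (fun hb => ⟨hx0, hx1, by omega, by omega, by rintro ⟨_, hh⟩; omega⟩)]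
  rw [pvUpd1 F hx0 hx1 hy0 hy1 _ (fun hb => ⟨by omega, by omega, hy0, hy1, by rintro ⟨hh, _⟩; omega⟩)]
  rw [pvUpd1 F hx0 hx1 hy0 hy1 _ (fun hb => ⟨hx0, hx1, by omega, by omega, by rintro ⟨_, hh⟩; omega⟩)]

lemma pvSim (grid : List (List Int))
    (hF1 : ∀ e ∈ pvT grid, e.1 = pvMatGet grid e.2.1 e.2.2 ∧ 0 ≤ e.2.1 ∧ e.2.1 < pvM grid ∧
            0 ≤ e.2.2 ∧ e.2.2 < pvN grid)
    (hNd : ((pvT grid).map (fun e => e.2)).Nodup)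
    (hPw : (pvT grid).Pairwise (fun a b => a.1 ≤ b.1))
    (hCm : ∀ x y : Int, 0 ≤ x → x < pvM grid → 0 ≤ y → y < pvN grid →
            (pvMatGet grid x y, (x, y)) ∈ pvT grid) :
    ∀ (R P : List (Int × (Int × Int))) (d : PySem.Dict (Int × Int) Int),
      pvT grid = P ++ R →
      d.keys = P.map (fun e => e.2) →
      (R.foldl (pvStepD grid) d).keys = (P ++ R).map (fun e => e.2) ∧
      R.foldl (pvStepA grid) (pvMk (pvM grid) (pvN grid) (fun i j => d.getD (i, j) 1)) =
        pvMk (pvM grid) (pvN grid) (fun i j => (R.foldl (pvStepD grid) d).getD (i, j) 1) := by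
  intro R
  induction R with
  | nil =>
    intro P d hT hk
    exact ⟨by simpa using hk, rfl⟩
  | cons e R ih =>
    intro P d hT hk
    obtain ⟨v, x, y⟩ := e
    have heT : (v, (x, y)) ∈ pvT grid := by
      rw [hT]; exact List.mem_append_right _ (List.mem_cons_self ..)
    obtain ⟨hev, hx0, hx1, hy0, hy1⟩ := hF1 _ heT
    dsimp only at hev hx0 hx1 hy0 hy1
    have hPnotin : (x, y) ∉ P.map (fun e => e.2) := by
      have hnd := hNd
      rw [hT, List.map_append, List.nodup_append] at hnd
      intro hmem
      exact hnd.2.2 _ hmem _ (by simp) rfl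
    have hnotc : d.contains (x, y) = false := by
      rw [PySem.Dict.contains_eq_decide_mem_keys, hk]
      simpa using hPnotin
    have hproc : ∀ x' y' : Int, 0 ≤ x' → x' < pvM grid → 0 ≤ y' → y' < pvN grid →
        pvMatGet grid x' y' < v → (x', y') ∈ d.keys := by
      intro x' y' h1 h2 h3 h4 hlt
      have hmem := hCm x' y' h1 h2 h3 h4
      rw [hT] at hmem
      rcases List.mem_append.mp hmem with hmem | hmem
      · rw [hk]; exact List.mem_map.mpr ⟨_, hmem, rfl⟩
      · exfalso
        rcases List.mem_cons.mp hmem with heq | hmem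
        · have := congrArg Prod.fst heq
          dsimp at this
          omega
        · have hpw := hPw
          rw [hT, List.pairwise_append] at hpw
          have := (List.pairwise_cons.mp hpw.2.1).1 _ hmem
          dsimp at this
          omega
    have hswap : ∀ k ∈ d.keys, d.getD k (1 : Int) = d.getD k 0 := by
      intro k hkk
      cases hg : d.get? k with
      | none =>
        exact absurd ((PySem.Dict.get?_eq_none_iff_not_mem_keys d k).mp hg) (by simpa using hkk)
      | some w =>
        rw [PySem.Dict.getD_eq_get?_getD, PySem.Dict.getD_eq_get?_getD, hg]
        rfl
    have hstepD : pvStepD grid d (v, (x, y)) =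
        d.insert (x, y) (PySem.Int.mod
          ([(x - 1, y), (x, y - 1), (x + 1, y), (x, y + 1)].foldl (fun c xy =>
            if 0 ≤ xy.1 ∧ xy.1 < pvM grid ∧ 0 ≤ xy.2 ∧ xy.2 < pvN grid ∧
                pvMatGet grid xy.1 xy.2 < v then
              c + d.getD xy 0
            else c) 1) 1000000007) := rfl
    have hval : pvAVal grid (fun i j => d.getD (i, j) 1) (v, (x, y)) =
        PySem.Int.mod
          ([(x - 1, y), (x, y - 1), (x + 1, y), (x, y + 1)].foldl (fun c xy =>
            if 0 ≤ xy.1 ∧ xy.1 < pvM grid ∧ 0 ≤ xy.2 ∧ xy.2 < pvN grid ∧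
                pvMatGet grid xy.1 xy.2 < v then
              c + d.getD xy 0
            else c) 1) 1000000007 := by
      simp only [pvAVal, List.foldl_cons, List.foldl_nil]
      try dsimp only
      rw [PySem.Dict.getD_of_not_contains d 1 hnotc]
      have hc1 : (0 ≤ x - 1 ∧ x - 1 < pvM grid ∧ 0 ≤ y ∧ y < pvN grid ∧
          pvMatGet grid (x - 1) y < v) ↔ (0 < x ∧ pvMatGet grid (x - 1) y < v) := by
        constructor
        · rintro ⟨a, _, _, _, hg⟩; exact ⟨by omega, hg⟩
        · rintro ⟨a, hg⟩; exact ⟨by omega, by omega, hy0, hy1, hg⟩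
      have hc2 : (0 ≤ x ∧ x < pvM grid ∧ 0 ≤ y - 1 ∧ y - 1 < pvN grid ∧
          pvMatGet grid x (y - 1) < v) ↔ (0 < y ∧ pvMatGet grid x (y - 1) < v) := by
        constructor
        · rintro ⟨_, _, a, _, hg⟩; exact ⟨by omega, hg⟩
        · rintro ⟨a, hg⟩; exact ⟨hx0, hx1, by omega, by omega, hg⟩
      have hc3 : (0 ≤ x + 1 ∧ x + 1 < pvM grid ∧ 0 ≤ y ∧ y < pvN grid ∧
          pvMatGet grid (x + 1) y < v) ↔ (x < pvM grid - 1 ∧ pvMatGet grid (x + 1) y < v) := by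
        constructor
        · rintro ⟨_, a, _, _, hg⟩; exact ⟨by omega, hg⟩
        · rintro ⟨a, hg⟩; exact ⟨by omega, by omega, hy0, hy1, hg⟩
      have hc4 : (0 ≤ x ∧ x < pvM grid ∧ 0 ≤ y + 1 ∧ y + 1 < pvN grid ∧
          pvMatGet grid x (y + 1) < v) ↔ (y < pvN grid - 1 ∧ pvMatGet grid x (y + 1) < v) := by
        constructor
        · rintro ⟨_, _, _, a, hg⟩; exact ⟨by omega, hg⟩
        · rintro ⟨a, hg⟩; exact ⟨hx0, hx1, by omega, by omega, hg⟩
      have hM : (0 : Int) < 1000000007 := by norm_num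
      simp only [hc1, hc2, hc3, hc4]
      by_cases b1 : 0 < x ∧ pvMatGet grid (x - 1) y < v <;>
        by_cases b2 : 0 < y ∧ pvMatGet grid x (y - 1) < v <;>
          by_cases b3 : x < pvM grid - 1 ∧ pvMatGet grid (x + 1) y < v <;>
            by_cases b4 : y < pvN grid - 1 ∧ pvMatGet grid x (y + 1) < v
      all_goals simp only [b1, b2, b3, b4, and_self, if_true, if_false]
      all_goals try rw [hswap (x - 1, y) (hproc (x - 1) y (by omega) (by omega) hy0 hy1 b1.2)]
      all_goals try rw [hswap (x, y - 1) (hproc x (y - 1) hx0 hx1 (by omega) (by omega) b2.2)]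
      all_goals try rw [hswap (x + 1, y) (hproc (x + 1) y (by omega) (by omega) hy0 hy1 b3.2)]
      all_goals try rw [hswap (x, y + 1) (hproc x (y + 1) hx0 hx1 (by omega) (by omega) b4.2)]
      all_goals simp only [PySem.Int.mod_eq_emod_of_pos hM]
      all_goals omega
    set wB := PySem.Int.mod
        ([(x - 1, y), (x, y - 1), (x + 1, y), (x, y + 1)].foldl (fun c xy =>
          if 0 ≤ xy.1 ∧ xy.1 < pvM grid ∧ 0 ≤ xy.2 ∧ xy.2 < pvN grid ∧
              pvMatGet grid xy.1 xy.2 < v then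
            c + d.getD xy 0
          else c) 1) 1000000007 with hwB
    have hT' : pvT grid = (P ++ [(v, (x, y))]) ++ R := by
      rw [List.append_assoc]; exact hT
    have hk' : (d.insert (x, y) wB).keys = (P ++ [(v, (x, y))]).map (fun e => e.2) := by
      rw [PySem.Dict.keys_insert_of_not_contains _ _ hnotc, hk, List.map_append]
      rfl
    obtain ⟨ihk, ihm⟩ := ih (P ++ [(v, (x, y))]) (d.insert (x, y) wB) hT' hk'
    constructor
    · rw [List.foldl_cons, hstepD, ihk, List.append_assoc]
      rfl
    · rw [List.foldl_cons, List.foldl_cons, hstepD]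
      rw [pvStepA_mk grid _ (v, (x, y)) hx0 hx1 hy0 hy1]
      have hmk : pvMk (pvM grid) (pvN grid)
          (pvUpd (fun i j => d.getD (i, j) 1) x y (pvAVal grid (fun i j => d.getD (i, j) 1) (v, (x, y)))) =
          pvMk (pvM grid) (pvN grid) (fun i j => (d.insert (x, y) wB).getD (i, j) 1) := by
        apply pvMk_congr
        intro i j _ _ _ _
        rw [PySem.Dict.getD_insert]
        by_cases hij : i = x ∧ j = y
        · obtain ⟨rfl, rfl⟩ := hij
          rw [pvUpd_self, hval, if_pos rfl]
        · rw [pvUpd_other _ _ _ _ hij, if_neg (by rintro heq; exact hij ⟨congrArg Prod.fst heq, congrArg Prod.snd heq⟩)]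
      rw [hmk]
      exact ihm

lemma pvGetD_swap (d : PySem.Dict (Int × Int) Int) (k : Int × Int) (hkk : k ∈ d.keys) :
    d.getD k (1 : Int) = d.getD k 0 := by
  cases hg : d.get? k with
  | none => exact absurd ((PySem.Dict.get?_eq_none_iff_not_mem_keys d k).mp hg) (by simpa using hkk)
  | some w =>
    rw [PySem.Dict.getD_eq_get?_getD, PySem.Dict.getD_eq_get?_getD, hg]
    rfl

lemma pvF1 (grid : List (List Int)) :
    ∀ e ∈ pvT grid, e.1 = pvMatGet grid e.2.1 e.2.2 ∧ 0 ≤ e.2.1 ∧ e.2.1 < pvM grid ∧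
      0 ≤ e.2.2 ∧ e.2.2 < pvN grid := by
  intro e he
  rw [pvT, PySem.List.mem_sorted, pvCells] at he
  rcases List.mem_flatMap.mp he with ⟨i, hi, he2⟩
  rcases List.mem_map.mp he2 with ⟨j, hj, rfl⟩
  rw [PySem.List.mem_pyRange_one] at hi hj
  exact ⟨rfl, hi.1, hi.2, hj.1, hj.2⟩

lemma pvNd (grid : List (List Int)) : ((pvT grid).map (fun e => e.2)).Nodup := by
  have hperm : ((pvT grid).map (fun e => e.2)).Perm ((pvCells grid).map (fun e => e.2)) :=
    (PySem.List.sorted_perm (pvCells grid) (fun t => t.1) false).map _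
  rw [hperm.nodup_iff, pvCells, List.map_flatMap]
  simp only [List.map_map]
  apply List.pairwise_flatMap.mpr
  constructor
  · intro i _
    exact (PySem.List.nodup_pyRange_one 0 (pvN grid)).map
      (fun a b h => by
        have := congrArg Prod.snd h
        simpa using this)
  · apply (PySem.List.pairwise_lt_pyRange_one 0 (pvM grid)).imp
    intro i1 i2 h12 p hp q hq
    rcases List.mem_map.mp hp with ⟨j1, _, rfl⟩
    rcases List.mem_map.mp hq with ⟨j2, _, rfl⟩
    intro heq
    have := congrArg Prod.fst heq
    simp at this
    omega

lemma pvCm (grid : List (List Int)) :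
    ∀ x y : Int, 0 ≤ x → x < pvM grid → 0 ≤ y → y < pvN grid →
      (pvMatGet grid x y, (x, y)) ∈ pvT grid := by
  intro x y h1 h2 h3 h4
  rw [pvT, PySem.List.mem_sorted, pvCells]
  exact List.mem_flatMap.mpr ⟨x, PySem.List.mem_pyRange_one.mpr ⟨h1, h2⟩,
    List.mem_map.mpr ⟨y, PySem.List.mem_pyRange_one.mpr ⟨h3, h4⟩, rfl⟩⟩

lemma pvSum_mk (m n : Int) (F : Int → Int → Int) :
    ((pvMk m n F).map (fun r => r.sum)).sum =
      ((PySem.List.pyRange 0 m).flatMap (fun i => (PySem.List.pyRange 0 n).map (fun j => F i j))).sum := by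
  rw [pvMk, List.flatMap_def, List.sum_flatten, List.map_map]

-- ---------- coherence of A's dictionary: its entries are pvF ----------
lemma pvCohSim (grid : List (List Int))
    (hF1 : ∀ e ∈ pvT grid, e.1 = pvMatGet grid e.2.1 e.2.2 ∧ 0 ≤ e.2.1 ∧ e.2.1 < pvM grid ∧
            0 ≤ e.2.2 ∧ e.2.2 < pvN grid)
    (hNd : ((pvT grid).map (fun e => e.2)).Nodup)
    (hPw : (pvT grid).Pairwise (fun a b => a.1 ≤ b.1))
    (hCm : ∀ x y : Int, 0 ≤ x → x < pvM grid → 0 ≤ y → y < pvN grid →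
            (pvMatGet grid x y, (x, y)) ∈ pvT grid) :
    ∀ (R P : List (Int × (Int × Int))) (d : PySem.Dict (Int × Int) Int),
      pvT grid = P ++ R →
      d.keys = P.map (fun e => e.2) →
      (∀ k ∈ d.keys, d.getD k 0 = pvF grid (pvM grid) (pvN grid) k) →
      (∀ k ∈ (R.foldl (pvStepD grid) d).keys,
        (R.foldl (pvStepD grid) d).getD k 0 = pvF grid (pvM grid) (pvN grid) k) := by
  intro R
  induction R with
  | nil =>
    intro P d _ _ hcoh
    exact hcoh
  | cons e R ih =>
    intro P d hT hk hcoh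
    obtain ⟨v, x, y⟩ := e
    have heT : (v, (x, y)) ∈ pvT grid := by
      rw [hT]; exact List.mem_append_right _ (List.mem_cons_self ..)
    obtain ⟨hev, hx0, hx1, hy0, hy1⟩ := hF1 _ heT
    dsimp only at hev hx0 hx1 hy0 hy1
    have hPnotin : (x, y) ∉ P.map (fun e => e.2) := by
      have hnd := hNd
      rw [hT, List.map_append, List.nodup_append] at hnd
      intro hmem
      exact hnd.2.2 _ hmem _ (by simp) rfl
    have hnotc : d.contains (x, y) = false := by
      rw [PySem.Dict.contains_eq_decide_mem_keys, hk]
      simpa using hPnotin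
    have hproc : ∀ x' y' : Int, 0 ≤ x' → x' < pvM grid → 0 ≤ y' → y' < pvN grid →
        pvMatGet grid x' y' < v → (x', y') ∈ d.keys := by
      intro x' y' h1 h2 h3 h4 hlt
      have hmem := hCm x' y' h1 h2 h3 h4
      rw [hT] at hmem
      rcases List.mem_append.mp hmem with hmem | hmem
      · rw [hk]; exact List.mem_map.mpr ⟨_, hmem, rfl⟩
      · exfalso
        rcases List.mem_cons.mp hmem with heq | hmem
        · have := congrArg Prod.fst heq
          dsimp at this
          omega
        · have hpw := hPw
          rw [hT, List.pairwise_append] at hpw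
          have := (List.pairwise_cons.mp hpw.2.1).1 _ hmem
          dsimp at this
          omega
    -- the inserted value equals pvF (x, y)
    have hstepD : pvStepD grid d (v, (x, y)) =
        d.insert (x, y) (PySem.Int.mod
          ([(x - 1, y), (x, y - 1), (x + 1, y), (x, y + 1)].foldl (fun c xy =>
            if 0 ≤ xy.1 ∧ xy.1 < pvM grid ∧ 0 ≤ xy.2 ∧ xy.2 < pvN grid ∧
                pvMatGet grid xy.1 xy.2 < v then
              c + d.getD xy 0
            else c) 1) 1000000007) := rfl
    have hfold : ([(x - 1, y), (x, y - 1), (x + 1, y), (x, y + 1)].foldl (fun c xy =>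
            if 0 ≤ xy.1 ∧ xy.1 < pvM grid ∧ 0 ≤ xy.2 ∧ xy.2 < pvN grid ∧
                pvMatGet grid xy.1 xy.2 < v then
              c + d.getD xy 0
            else c) 1) =
        1 + ((pvDownL grid (pvM grid) (pvN grid) (x, y)).map (fun xy => d.getD xy 0)).sum := by
      rw [pvFoldl_filter (fun xy => 0 ≤ xy.1 ∧ xy.1 < pvM grid ∧ 0 ≤ xy.2 ∧ xy.2 < pvN grid ∧
            pvMatGet grid xy.1 xy.2 < v) (fun xy => d.getD xy 0)]
      rw [pvDownL, pvNbr, hev]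
    have hvalF : PySem.Int.mod
          ([(x - 1, y), (x, y - 1), (x + 1, y), (x, y + 1)].foldl (fun c xy =>
            if 0 ≤ xy.1 ∧ xy.1 < pvM grid ∧ 0 ≤ xy.2 ∧ xy.2 < pvN grid ∧
                pvMatGet grid xy.1 xy.2 < v then
              c + d.getD xy 0
            else c) 1) 1000000007 = pvF grid (pvM grid) (pvN grid) (x, y) := by
      rw [hfold]
      rw [pvF_eq grid (pvM grid) (pvN grid) (x, y)]
      congr 2
      apply congrArg List.sum
      apply List.map_congr_left
      intro xy hxy
      have hmem := List.mem_filter.mp hxy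
      have hcond := hmem.2
      rw [decide_eq_true_iff] at hcond
      obtain ⟨hc1, hc2, hc3, hc4, hc5⟩ := hcond
      have hkmem : xy ∈ d.keys := by
        have := hproc xy.1 xy.2 hc1 hc2 hc3 hc4 (by rw [← hev] at hc5; exact hc5)
        simpa using this
      exact hcoh xy hkmem
    -- set up the induction step
    have hT' : pvT grid = (P ++ [(v, (x, y))]) ++ R := by
      rw [List.append_assoc]; exact hT
    have hk' : (pvStepD grid d (v, (x, y))).keys = (P ++ [(v, (x, y))]).map (fun e => e.2) := by
      rw [hstepD, PySem.Dict.keys_insert_of_not_contains _ _ hnotc, hk, List.map_append]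
      rfl
    have hcoh' : ∀ k ∈ (pvStepD grid d (v, (x, y))).keys,
        (pvStepD grid d (v, (x, y))).getD k 0 = pvF grid (pvM grid) (pvN grid) k := by
      intro k hkmem
      rw [hstepD] at hkmem ⊢
      rw [PySem.Dict.getD_insert]
      rcases (PySem.Dict.mem_keys_insert ..).mp hkmem with rfl | hold
      · rw [if_pos rfl, hvalF]
      · by_cases hkxy : k = (x, y)
        · subst hkxy
          rw [if_pos rfl, hvalF]
        · rw [if_neg hkxy]
          exact hcoh k hold
    intro k hkm
    exact ih (P ++ [(v, (x, y))]) (pvStepD grid d (v, (x, y))) hT' hk' hcoh' k hkm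

lemma pvCells_map (grid : List (List Int)) {β : Type} (f : (Int × Int) → β) :
    (pvCells grid).map (fun e => f e.2) =
      (pvCoordsMN (pvM grid) (pvN grid)).map f := by
  simp only [pvCells, pvCoordsMN, List.map_flatMap, List.map_map]
  rfl

lemma pvA_sum (grid : List (List Int)) :
    countPaths grid =
      PySem.Int.mod (((pvCoordsMN (pvM grid) (pvN grid)).map
        (pvF grid (pvM grid) (pvN grid))).sum) 1000000007 := by
  rw [pvA_norm]
  obtain ⟨hkeys, hmat⟩ := pvSim grid (pvF1 grid) (pvNd grid)
    (PySem.List.sorted_pairwise (pvCells grid) (fun t => t.1)) (pvCm grid)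
    (pvT grid) [] PySem.Dict.empty (by simp) (by simp [PySem.Dict.keys_empty])
  have hcohT := pvCohSim grid (pvF1 grid) (pvNd grid)
    (PySem.List.sorted_pairwise (pvCells grid) (fun t => t.1)) (pvCm grid)
    (pvT grid) [] PySem.Dict.empty (by simp) (by simp [PySem.Dict.keys_empty])
    (by intro k hk; rw [PySem.Dict.keys_empty] at hk; cases hk)
  have hinit : pvMk (pvM grid) (pvN grid) (fun _ _ => (1 : Int)) =
      pvMk (pvM grid) (pvN grid)
        (fun i j => (PySem.Dict.empty : PySem.Dict (Int × Int) Int).getD (i, j) 1) := by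
    apply pvMk_congr
    intro i j _ _ _ _
    rw [PySem.Dict.getD_empty]
  rw [hinit, hmat]
  congr 1
  set dT := (pvT grid).foldl (pvStepD grid) PySem.Dict.empty with hdT
  have hkeysT : dT.keys = (pvT grid).map (fun e => e.2) := by simpa using hkeys
  rw [pvSum_mk]
  have hlhs : ((PySem.List.pyRange 0 (pvM grid)).flatMap
      (fun i => (PySem.List.pyRange 0 (pvN grid)).map (fun j => dT.getD (i, j) 1))).sum =
      ((pvCells grid).map (fun e => dT.getD e.2 1)).sum := by
    rw [pvCells, List.map_flatMap]
    simp only [List.map_map]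
    rfl
  rw [hlhs]
  rw [← pvCells_map grid (pvF grid (pvM grid) (pvN grid))]
  apply congrArg List.sum
  apply List.map_congr_left
  intro e he
  have hmemT : e.2 ∈ dT.keys := by
    rw [hkeysT]
    have hperm : (pvT grid).Perm (pvCells grid) :=
      PySem.List.sorted_perm (pvCells grid) (fun t => t.1) false
    exact List.mem_map.mpr ⟨e, hperm.mem_iff.mpr he, rfl⟩
  rw [pvGetD_swap dT e.2 hmemT]
  exact hcohT e.2 hmemT

-- ---------- B-side machine correctness ----------
def pvCoh (grid : List (List Int)) (m n : Int) (memo : PySem.Dict (Int × Int) Int) : Prop :=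
  ∀ k ∈ memo.keys, memo.getD k 0 = pvG grid m n k

def pvInv (grid : List (List Int)) (m n : Int)
    (stack : List ((Int × Int) × Bool)) (memo : PySem.Dict (Int × Int) Int) : Prop :=
  ∀ pre c post, stack = pre ++ ((c, true) :: post) →
    ∀ d ∈ pvUpL grid m n c, d ∈ memo.keys ∨ ∃ b, (d, b) ∈ pre

lemma pvSplit_helper {E : Type} (x : E) (f : E → Bool) :
    ∀ (P Q pre post : List E), (∀ y ∈ P, f y = false) → f x = true →
      P ++ Q = pre ++ x :: post → ∃ pre₂, pre = P ++ pre₂ ∧ Q = pre₂ ++ x :: post := by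
  intro P
  induction P with
  | nil =>
    intro Q pre post _ _ h
    exact ⟨pre, rfl, h⟩
  | cons p P ihp =>
    intro Q pre post hP hx h
    cases pre with
    | nil =>
      simp only [List.nil_append] at h
      have hpx : p = x := (List.cons_eq_cons.mp h).1
      have := hP p (List.mem_cons_self ..)
      rw [hpx, hx] at this
      cases this
    | cons a pre' =>
      simp only [List.cons_append, List.cons_eq_cons] at h
      obtain ⟨rfl, h2⟩ := h
      obtain ⟨pre₂, hp1, hp2⟩ := ihp Q pre' post (fun y hy => hP y (List.mem_cons_of_mem _ hy)) hx h2
      exact ⟨pre₂, by rw [List.cons_append, hp1], hp2⟩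

lemma pvLoop_spec (grid : List (List Int)) (m n : Int) :
    ∀ (stack : List ((Int × Int) × Bool)) (memo : PySem.Dict (Int × Int) Int),
      pvCoh grid m n memo → pvInv grid m n stack memo →
      pvCoh grid m n (pvLoop grid m n stack memo) ∧
      (∀ k ∈ memo.keys, k ∈ (pvLoop grid m n stack memo).keys) ∧
      (∀ e ∈ stack, e.1 ∈ (pvLoop grid m n stack memo).keys) := by
  intro stack memo
  induction stack, memo using pvLoop.induct grid m n with
  | case1 memo =>
    intro hcoh _
    have hL : pvLoop grid m n [] memo = memo := by rw [pvLoop]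
    exact ⟨by rwa [hL], fun k hk => by rwa [hL], fun e he => absurd he (List.not_mem_nil)⟩
  | case2 c rest memo v ih =>
    intro hcoh hinv
    -- all strictly larger in-bounds neighbours of c are already memoised
    have hup : ∀ d ∈ pvUpL grid m n c, d ∈ memo.keys := by
      intro d hd
      rcases hinv [] c rest rfl d hd with h | ⟨b, hb⟩
      · exact h
      · exact absurd hb (List.not_mem_nil)
    -- the finalisation value is pvG c
    have hval : PySem.Int.mod ((pvNbr c).foldl (fun a d =>
        if 0 ≤ d.1 ∧ d.1 < m ∧ 0 ≤ d.2 ∧ d.2 < n ∧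
            pvMatGet grid c.1 c.2 < pvMatGet grid d.1 d.2 then
          a + memo.getD d 0
        else a) 1) 1000000007 = pvG grid m n c := by
      rw [pvFoldl_filter (fun d => 0 ≤ d.1 ∧ d.1 < m ∧ 0 ≤ d.2 ∧ d.2 < n ∧
            pvMatGet grid c.1 c.2 < pvMatGet grid d.1 d.2) (fun d => memo.getD d 0)]
      rw [pvG_eq grid m n c]
      congr 2
      apply congrArg List.sum
      apply List.map_congr_left
      intro d hd
      exact hcoh d (hup d (by rwa [pvUpL, pvNbr]))
    have hv : v = (pvNbr c).foldl (fun a d =>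
        if 0 ≤ d.1 ∧ d.1 < m ∧ 0 ≤ d.2 ∧ d.2 < n ∧
            pvMatGet grid c.1 c.2 < pvMatGet grid d.1 d.2 then
          a + memo.getD d 0
        else a) 1 := rfl
    rw [hv, hval] at ih
    have hstep : pvLoop grid m n ((c, true) :: rest) memo =
        pvLoop grid m n rest (memo.insert c (pvG grid m n c)) := by
      rw [pvLoop]
      rw [hval]
    have hcoh' : pvCoh grid m n (memo.insert c (pvG grid m n c)) := by
      intro k hk
      rw [PySem.Dict.getD_insert]
      by_cases hkc : k = c
      · rw [if_pos hkc, hkc]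
      · rw [if_neg hkc]
        rcases (PySem.Dict.mem_keys_insert ..).mp hk with h | h
        · exact absurd h hkc
        · exact hcoh k h
    have hinv' : pvInv grid m n rest (memo.insert c (pvG grid m n c)) := by
      intro pre c' post hsplit d hd
      rcases hinv ((c, true) :: pre) c' post (by rw [hsplit]; rfl) d hd with h | ⟨b, hb⟩
      · exact Or.inl ((PySem.Dict.mem_keys_insert ..).mpr (Or.inr h))
      · rcases List.mem_cons.mp hb with heq | hpre
        · have hdc : d = c := congrArg Prod.fst heq
          exact Or.inl ((PySem.Dict.mem_keys_insert ..).mpr (Or.inl hdc))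
        · exact Or.inr ⟨b, hpre⟩
    obtain ⟨C1, C2, C3⟩ := ih hcoh' hinv'
    refine ⟨by rwa [hstep], ?_, ?_⟩
    · intro k hk
      rw [hstep]
      exact C2 k ((PySem.Dict.mem_keys_insert ..).mpr (Or.inr hk))
    · intro e he
      rw [hstep]
      rcases List.mem_cons.mp he with rfl | hrest
      · exact C2 c ((PySem.Dict.mem_keys_insert ..).mpr (Or.inl rfl))
      · exact C3 e hrest
  | case3 c rest memo hc ih =>
    intro hcoh hinv
    have hinv' : pvInv grid m n rest memo := by
      intro pre c' post hsplit d hd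
      rcases hinv ((c, false) :: pre) c' post (by rw [hsplit]; rfl) d hd with h | ⟨b, hb⟩
      · exact Or.inl h
      · rcases List.mem_cons.mp hb with heq | hpre
        · have hdc : d = c := congrArg Prod.fst heq
          refine Or.inl ?_
          rw [PySem.Dict.contains_eq_decide_mem_keys] at hc
          rw [hdc]
          exact of_decide_eq_true hc
        · exact Or.inr ⟨b, hpre⟩
    obtain ⟨C1, C2, C3⟩ := ih hcoh hinv'
    have hstep : pvLoop grid m n ((c, false) :: rest) memo = pvLoop grid m n rest memo := by
      rw [pvLoop, if_pos hc]
    refine ⟨by rwa [hstep], fun k hk => by rw [hstep]; exact C2 k hk, ?_⟩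
    intro e he
    rw [hstep]
    rcases List.mem_cons.mp he with rfl | hrest
    · refine C2 c ?_
      rw [PySem.Dict.contains_eq_decide_mem_keys] at hc
      exact of_decide_eq_true hc
    · exact C3 e hrest
  | case4 c rest memo hc ih =>
    intro hcoh hinv
    set pending := (pvNbr c).filter (fun d =>
        decide (0 ≤ d.1 ∧ d.1 < m ∧ 0 ≤ d.2 ∧ d.2 < n ∧
          pvMatGet grid c.1 c.2 < pvMatGet grid d.1 d.2) && !(memo.contains d)) with hP
    set S' := ((pending.map (fun d => (d, false))).reverse ++ (c, true) :: rest) with hS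
    have hstep : pvLoop grid m n ((c, false) :: rest) memo = pvLoop grid m n S' memo := by
      rw [pvLoop, if_neg hc]
    have hfalse : ∀ y ∈ (pending.map (fun d => ((d, false) : (Int × Int) × Bool))).reverse,
        y.2 = false := by
      intro y hy
      rcases List.mem_map.mp (List.mem_reverse.mp hy) with ⟨d, _, rfl⟩
      rfl
    have hinv' : pvInv grid m n S' memo := by
      intro pre c' post hsplit d hd
      obtain ⟨pre₂, hpre1, hpre2⟩ := pvSplit_helper ((c', true)) (fun y => y.2)
        ((pending.map (fun d => (d, false))).reverse) ((c, true) :: rest) pre post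
        hfalse rfl (by rw [← hsplit])
      cases pre₂ with
      | nil =>
        -- c' = c : every larger neighbour is memoised or freshly pushed
        simp only [List.nil_append, List.cons_eq_cons] at hpre2
        have hcc : c' = c := (congrArg Prod.fst hpre2.1).symm
        rw [hcc] at hd
        by_cases hdc : memo.contains d = true
        · refine Or.inl ?_
          rw [PySem.Dict.contains_eq_decide_mem_keys] at hdc
          exact of_decide_eq_true hdc
        · refine Or.inr ⟨false, ?_⟩
          have hdp : d ∈ pending := by
            rw [hP]
            apply List.mem_filter.mpr
            rw [pvUpL] at hd
            have hm := List.mem_filter.mp hd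
            refine ⟨hm.1, ?_⟩
            rw [Bool.and_eq_true, Bool.not_eq_eq_eq_not]
            exact ⟨hm.2, by simpa using hdc⟩
          rw [hpre1, List.append_nil]
          exact List.mem_reverse.mpr (List.mem_map.mpr ⟨d, hdp, rfl⟩)
      | cons z pre₃ =>
        have hz : z = (c, true) ∧ rest = pre₃ ++ (c', true) :: post := by
          rw [List.cons_append] at hpre2
          exact ⟨((List.cons_eq_cons.mp hpre2).1).symm, (List.cons_eq_cons.mp hpre2).2⟩
        rcases hinv ((c, false) :: pre₃) c' post (by rw [hz.2]; rfl) d hd with h | ⟨b, hb⟩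
        · exact Or.inl h
        · rcases List.mem_cons.mp hb with heq | hpre₃
          · have hdc2 : d = c := congrArg Prod.fst heq
            refine Or.inr ⟨true, ?_⟩
            rw [hpre1, hz.1, hdc2]
            exact List.mem_append_right _ (List.mem_cons_self ..)
          · exact Or.inr ⟨b, by rw [hpre1]; exact List.mem_append_right _ (List.mem_cons_of_mem _ hpre₃)⟩
    obtain ⟨C1, C2, C3⟩ := ih hcoh hinv'
    refine ⟨by rwa [hstep], fun k hk => by rw [hstep]; exact C2 k hk, ?_⟩
    intro e he
    rw [hstep]
    rcases List.mem_cons.mp he with rfl | hrest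
    · exact C3 (c, true) (by rw [hS]; exact List.mem_append_right _ (List.mem_cons_self ..))
    · exact C3 e (by rw [hS]; exact List.mem_append_right _ (List.mem_cons_of_mem _ hrest))

lemma pvInv_single (grid : List (List Int)) (m n : Int) (c0 : Int × Int)
    (memo : PySem.Dict (Int × Int) Int) :
    pvInv grid m n [(c0, false)] memo := by
  intro pre c' post hsplit d hd
  exfalso
  cases pre with
  | nil =>
    have := (List.cons_eq_cons.mp hsplit).1
    have := congrArg Prod.snd this
    simp at this
  | cons a pre' =>
    rw [List.cons_append] at hsplit
    have := (List.cons_eq_cons.mp hsplit).2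
    exact absurd this.symm (by simp)

lemma pvBfold (grid : List (List Int)) (m n : Int) :
    ∀ (roots : List (Int × Int)) (st : PySem.Dict (Int × Int) Int × Int),
      pvCoh grid m n st.1 →
      pvCoh grid m n ((roots.foldl (fun st c =>
        let memo := pvLoop grid m n [(c, false)] st.1
        (memo, st.2 + memo.getD c 0)) st).1) ∧
      (roots.foldl (fun st c =>
        let memo := pvLoop grid m n [(c, false)] st.1
        (memo, st.2 + memo.getD c 0)) st).2 = st.2 + (roots.map (pvG grid m n)).sum := by
  intro roots
  induction roots with
  | nil =>
    intro st hcoh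
    exact ⟨hcoh, by simp⟩
  | cons c roots ih =>
    intro st hcoh
    obtain ⟨C1, C2, C3⟩ := pvLoop_spec grid m n [(c, false)] st.1 hcoh
      (pvInv_single grid m n c st.1)
    have hcmem : c ∈ (pvLoop grid m n [(c, false)] st.1).keys :=
      C3 (c, false) (List.mem_cons_self ..)
    have hcval : (pvLoop grid m n [(c, false)] st.1).getD c 0 = pvG grid m n c :=
      C1 c hcmem
    dsimp only [List.foldl_cons]
    obtain ⟨D1, D2⟩ := ih (pvLoop grid m n [(c, false)] st.1,
      st.2 + (pvLoop grid m n [(c, false)] st.1).getD c 0) C1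
    refine ⟨D1, ?_⟩
    rw [D2]
    dsimp only
    rw [hcval, List.map_cons, List.sum_cons]
    ring

lemma pvB_sum (grid : List (List Int)) :
    countPaths_alt grid =
      PySem.Int.mod (((pvCoordsMN (pvM grid) (pvN grid)).map
        (pvG grid (pvM grid) (pvN grid))).sum) 1000000007 := by
  have hm : pvM grid = grid.length := rfl
  have hn : pvN grid = (PySem.List.pyGetD grid 0 []).length := rfl
  simp only [countPaths_alt]
  rw [← hm, ← hn, show (10:Int)^9+7 = 1000000007 from by norm_num]
  have hflat : ((PySem.List.pyRange 0 (pvM grid)).foldl (fun st i =>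
      (PySem.List.pyRange 0 (pvN grid)).foldl (fun st j =>
        let memo := pvLoop grid (pvM grid) (pvN grid) [((i, j), false)] st.1
        (memo, st.2 + memo.getD (i, j) 0)) st)
      ((PySem.Dict.empty : PySem.Dict (Int × Int) Int), (0 : Int))) =
      ((pvCoordsMN (pvM grid) (pvN grid)).foldl (fun st c =>
        let memo := pvLoop grid (pvM grid) (pvN grid) [(c, false)] st.1
        (memo, st.2 + memo.getD c 0))
      ((PySem.Dict.empty : PySem.Dict (Int × Int) Int), (0 : Int))) := by
    rw [pvCoordsMN, List.foldl_flatMap]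
    apply PySem.List.foldl_congr_mem
    intro st i _
    rw [List.foldl_map]
  rw [hflat]
  obtain ⟨_, D2⟩ := pvBfold grid (pvM grid) (pvN grid) (pvCoordsMN (pvM grid) (pvN grid))
    ((PySem.Dict.empty : PySem.Dict (Int × Int) Int), (0 : Int))
    (by intro k hk; rw [PySem.Dict.keys_empty] at hk; cases hk)
  rw [D2]
  norm_num

-- ---------- the combinatorial core: Σ pvF = Σ pvG (mod p) ----------
def pvCellS (m n : Int) : Finset (Int × Int) := (pvCoordsMN m n).toFinset

def pvAseq (grid : List (List Int)) (m n : Int) : ℕ → (Int × Int) → ZMod 1000000007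
  | 0, _ => 1
  | (k+1), c => ∑ d ∈ (pvCellS m n).filter (fun d =>
      d ∈ pvNbr c ∧ pvMatGet grid d.1 d.2 < pvMatGet grid c.1 c.2), pvAseq grid m n k d

def pvBseq (grid : List (List Int)) (m n : Int) : ℕ → (Int × Int) → ZMod 1000000007
  | 0, _ => 1
  | (k+1), c => ∑ d ∈ (pvCellS m n).filter (fun d =>
      d ∈ pvNbr c ∧ pvMatGet grid c.1 c.2 < pvMatGet grid d.1 d.2), pvBseq grid m n k d

lemma pvCastMod (a : Int) :
    ((PySem.Int.mod a 1000000007 : Int) : ZMod 1000000007) = (a : ZMod 1000000007) := by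
  rw [PySem.Int.mod_eq_emod_of_pos (by norm_num)]
  have hp : (1000000007 : ZMod 1000000007) = 0 := by
    have h := ZMod.natCast_self 1000000007
    rwa [Nat.cast_ofNat] at h
  conv_rhs => rw [← Int.emod_add_mul_ediv a 1000000007]
  push_cast
  rw [hp]
  ring

-- Finset ranks (cardinal versions, used for the vanishing argument)
def pvRkD (grid : List (List Int)) (m n : Int) (c : Int × Int) : Nat :=
  ((pvCellS m n).filter (fun d => pvMatGet grid d.1 d.2 < pvMatGet grid c.1 c.2)).card

def pvRkU (grid : List (List Int)) (m n : Int) (c : Int × Int) : Nat :=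
  ((pvCellS m n).filter (fun d => pvMatGet grid c.1 c.2 < pvMatGet grid d.1 d.2)).card

lemma pvRkD_le (grid : List (List Int)) (m n : Int) (c : Int × Int) :
    pvRkD grid m n c ≤ (pvCellS m n).card :=
  Finset.card_filter_le _ _

lemma pvRkU_le (grid : List (List Int)) (m n : Int) (c : Int × Int) :
    pvRkU grid m n c ≤ (pvCellS m n).card :=
  Finset.card_filter_le _ _

lemma pvRkD_lt (grid : List (List Int)) (m n : Int) {c d : Int × Int}
    (hd : d ∈ pvCellS m n) (hv : pvMatGet grid d.1 d.2 < pvMatGet grid c.1 c.2) :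
    pvRkD grid m n d < pvRkD grid m n c := by
  apply Finset.card_lt_card
  constructor
  · intro e he
    have := Finset.mem_filter.mp he
    exact Finset.mem_filter.mpr ⟨this.1, by have := this.2; omega⟩
  · intro hsub
    have hdm : d ∈ (pvCellS m n).filter (fun e => pvMatGet grid e.1 e.2 < pvMatGet grid c.1 c.2) :=
      Finset.mem_filter.mpr ⟨hd, hv⟩
    have := Finset.mem_filter.mp (hsub hdm)
    omega

lemma pvRkU_lt (grid : List (List Int)) (m n : Int) {c d : Int × Int}
    (hd : d ∈ pvCellS m n) (hv : pvMatGet grid c.1 c.2 < pvMatGet grid d.1 d.2) :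
    pvRkU grid m n d < pvRkU grid m n c := by
  apply Finset.card_lt_card
  constructor
  · intro e he
    have := Finset.mem_filter.mp he
    exact Finset.mem_filter.mpr ⟨this.1, by have := this.2; omega⟩
  · intro hsub
    have hdm : d ∈ (pvCellS m n).filter (fun e => pvMatGet grid c.1 c.2 < pvMatGet grid e.1 e.2) :=
      Finset.mem_filter.mpr ⟨hd, hv⟩
    have := Finset.mem_filter.mp (hsub hdm)
    omega

lemma pvAseq_vanish (grid : List (List Int)) (m n : Int) :
    ∀ (k : ℕ) (c : Int × Int), pvRkD grid m n c < k → pvAseq grid m n k c = 0 := by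
  intro k
  induction k with
  | zero => intro c h; omega
  | succ k ih =>
    intro c h
    rw [pvAseq]
    apply Finset.sum_eq_zero
    intro d hdm
    have hm := Finset.mem_filter.mp hdm
    have hlt := pvRkD_lt grid m n hm.1 hm.2.2
    exact ih d (by omega)

lemma pvBseq_vanish (grid : List (List Int)) (m n : Int) :
    ∀ (k : ℕ) (c : Int × Int), pvRkU grid m n c < k → pvBseq grid m n k c = 0 := by
  intro k
  induction k with
  | zero => intro c h; omega
  | succ k ih =>
    intro c h
    rw [pvBseq]
    apply Finset.sum_eq_zero
    intro d hdm
    have hm := Finset.mem_filter.mp hdm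
    have hlt := pvRkU_lt grid m n hm.1 hm.2.2
    exact ih d (by omega)

-- list-to-Finset bridge for the neighbour sums
lemma pvDownL_toFinset (grid : List (List Int)) (m n : Int) (c : Int × Int) :
    (pvDownL grid m n c).toFinset =
      (pvCellS m n).filter (fun d =>
        d ∈ pvNbr c ∧ pvMatGet grid d.1 d.2 < pvMatGet grid c.1 c.2) := by
  apply Finset.ext
  intro d
  rw [List.mem_toFinset, Finset.mem_filter, pvDownL, List.mem_filter, decide_eq_true_iff,
    pvCellS, List.mem_toFinset, pvMem_coordsMN]
  constructor
  · rintro ⟨hnb, h1, h2, h3, h4, h5⟩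
    exact ⟨⟨h1, h2, h3, h4⟩, hnb, h5⟩
  · rintro ⟨⟨h1, h2, h3, h4⟩, hnb, h5⟩
    exact ⟨hnb, h1, h2, h3, h4, h5⟩

lemma pvUpL_toFinset (grid : List (List Int)) (m n : Int) (c : Int × Int) :
    (pvUpL grid m n c).toFinset =
      (pvCellS m n).filter (fun d =>
        d ∈ pvNbr c ∧ pvMatGet grid c.1 c.2 < pvMatGet grid d.1 d.2) := by
  apply Finset.ext
  intro d
  rw [List.mem_toFinset, Finset.mem_filter, pvUpL, List.mem_filter, decide_eq_true_iff,
    pvCellS, List.mem_toFinset, pvMem_coordsMN]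
  constructor
  · rintro ⟨hnb, h1, h2, h3, h4, h5⟩
    exact ⟨⟨h1, h2, h3, h4⟩, hnb, h5⟩
  · rintro ⟨⟨h1, h2, h3, h4⟩, hnb, h5⟩
    exact ⟨hnb, h1, h2, h3, h4, h5⟩

lemma pvList_finset_sum {l : List (Int × Int)} (hnd : l.Nodup) (f : (Int × Int) → ZMod 1000000007) :
    ((l.map f).sum : ZMod 1000000007) = ∑ d ∈ l.toFinset, f d := by
  rw [List.sum_toFinset _ hnd]

-- cast recurrences
lemma pvFz_rec (grid : List (List Int)) (m n : Int) (c : Int × Int) :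
    ((pvF grid m n c : Int) : ZMod 1000000007) =
      1 + ∑ d ∈ (pvCellS m n).filter (fun d =>
        d ∈ pvNbr c ∧ pvMatGet grid d.1 d.2 < pvMatGet grid c.1 c.2),
          ((pvF grid m n d : Int) : ZMod 1000000007) := by
  rw [pvF_eq, pvCastMod]
  push_cast [Int.cast_list_sum]
  rw [List.map_map]
  simp only [Function.comp_def]
  have hnd : (pvDownL grid m n c).Nodup := by
    rw [pvDownL]; exact (pvNbr_nodup c).filter _
  rw [pvList_finset_sum hnd (fun d => ((pvF grid m n d : Int) : ZMod 1000000007))]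
  rw [pvDownL_toFinset]

lemma pvGz_rec (grid : List (List Int)) (m n : Int) (c : Int × Int) :
    ((pvG grid m n c : Int) : ZMod 1000000007) =
      1 + ∑ d ∈ (pvCellS m n).filter (fun d =>
        d ∈ pvNbr c ∧ pvMatGet grid c.1 c.2 < pvMatGet grid d.1 d.2),
          ((pvG grid m n d : Int) : ZMod 1000000007) := by
  rw [pvG_eq, pvCastMod]
  push_cast [Int.cast_list_sum]
  rw [List.map_map]
  simp only [Function.comp_def]
  have hnd : (pvUpL grid m n c).Nodup := by
    rw [pvUpL]; exact (pvNbr_nodup c).filter _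
  rw [pvList_finset_sum hnd (fun d => ((pvG grid m n d : Int) : ZMod 1000000007))]
  rw [pvUpL_toFinset]

-- Fz / Gz as truncated generating sums
lemma pvFz_T (grid : List (List Int)) (m n : Int) :
    ∀ (r : ℕ) (c : Int × Int), pvRkD grid m n c ≤ r →
      ((pvF grid m n c : Int) : ZMod 1000000007) =
        ∑ k ∈ Finset.range ((pvCellS m n).card + 1), pvAseq grid m n k c := by
  intro r
  induction r with
  | zero =>
    intro c hr
    have hempty : (pvCellS m n).filter (fun d =>
        pvMatGet grid d.1 d.2 < pvMatGet grid c.1 c.2) = ∅ :=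
      Finset.card_eq_zero.mp (by unfold pvRkD at hr; omega)
    have hemp2 : (pvCellS m n).filter (fun d =>
        d ∈ pvNbr c ∧ pvMatGet grid d.1 d.2 < pvMatGet grid c.1 c.2) = ∅ := by
      apply Finset.eq_empty_of_forall_notMem
      intro d hdm
      have hm := Finset.mem_filter.mp hdm
      have : d ∈ (pvCellS m n).filter (fun d =>
          pvMatGet grid d.1 d.2 < pvMatGet grid c.1 c.2) :=
        Finset.mem_filter.mpr ⟨hm.1, hm.2.2⟩
      rw [hempty] at this
      cases this
    rw [pvFz_rec, hemp2]
    rw [Finset.sum_range_succ']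
    have hz : ∀ k ∈ Finset.range ((pvCellS m n).card), pvAseq grid m n (k + 1) c = 0 := by
      intro k _
      rw [pvAseq, hemp2, Finset.sum_empty]
    rw [Finset.sum_congr rfl hz]
    simp [pvAseq]
  | succ r ih =>
    intro c hr
    have hsum : ∀ d ∈ (pvCellS m n).filter (fun d =>
        d ∈ pvNbr c ∧ pvMatGet grid d.1 d.2 < pvMatGet grid c.1 c.2),
        ((pvF grid m n d : Int) : ZMod 1000000007) =
          ∑ k ∈ Finset.range ((pvCellS m n).card + 1), pvAseq grid m n k d := by
      intro d hdm
      have hm := Finset.mem_filter.mp hdm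
      have hlt := pvRkD_lt grid m n hm.1 hm.2.2
      have hrc : pvRkD grid m n c ≤ r + 1 := hr
      exact ih d (by omega)
    have hinner : ∀ d ∈ (pvCellS m n).filter (fun d =>
        d ∈ pvNbr c ∧ pvMatGet grid d.1 d.2 < pvMatGet grid c.1 c.2),
        ∑ k ∈ Finset.range ((pvCellS m n).card + 1), pvAseq grid m n k d =
          ∑ k ∈ Finset.range ((pvCellS m n).card), pvAseq grid m n k d := by
      intro d hdm
      have hm := Finset.mem_filter.mp hdm
      rw [Finset.sum_range_succ]
      have hvan : pvAseq grid m n ((pvCellS m n).card) d = 0 := by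
        apply pvAseq_vanish
        have h1 := pvRkD_lt grid m n hm.1 hm.2.2
        have h2 := pvRkD_le grid m n c
        omega
      rw [hvan, add_zero]
    calc ((pvF grid m n c : Int) : ZMod 1000000007)
        = 1 + ∑ d ∈ (pvCellS m n).filter (fun d =>
            d ∈ pvNbr c ∧ pvMatGet grid d.1 d.2 < pvMatGet grid c.1 c.2),
              ((pvF grid m n d : Int) : ZMod 1000000007) := pvFz_rec grid m n c
      _ = 1 + ∑ d ∈ (pvCellS m n).filter (fun d =>
            d ∈ pvNbr c ∧ pvMatGet grid d.1 d.2 < pvMatGet grid c.1 c.2),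
              ∑ k ∈ Finset.range ((pvCellS m n).card), pvAseq grid m n k d := by
          rw [Finset.sum_congr rfl (fun d hd => (hsum d hd).trans (hinner d hd))]
      _ = 1 + ∑ k ∈ Finset.range ((pvCellS m n).card), ∑ d ∈ (pvCellS m n).filter (fun d =>
            d ∈ pvNbr c ∧ pvMatGet grid d.1 d.2 < pvMatGet grid c.1 c.2),
              pvAseq grid m n k d := by rw [Finset.sum_comm]
      _ = 1 + ∑ k ∈ Finset.range ((pvCellS m n).card), pvAseq grid m n (k + 1) c := by
          simp only [pvAseq]
      _ = ∑ k ∈ Finset.range ((pvCellS m n).card + 1), pvAseq grid m n k c := by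
          rw [Finset.sum_range_succ' (fun k => pvAseq grid m n k c) ((pvCellS m n).card)]
          have h0 : pvAseq grid m n 0 c = 1 := rfl
          rw [h0]
          ring

lemma pvGz_T (grid : List (List Int)) (m n : Int) :
    ∀ (r : ℕ) (c : Int × Int), pvRkU grid m n c ≤ r →
      ((pvG grid m n c : Int) : ZMod 1000000007) =
        ∑ k ∈ Finset.range ((pvCellS m n).card + 1), pvBseq grid m n k c := by
  intro r
  induction r with
  | zero =>
    intro c hr
    have hempty : (pvCellS m n).filter (fun d =>
        pvMatGet grid c.1 c.2 < pvMatGet grid d.1 d.2) = ∅ :=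
      Finset.card_eq_zero.mp (by unfold pvRkU at hr; omega)
    have hemp2 : (pvCellS m n).filter (fun d =>
        d ∈ pvNbr c ∧ pvMatGet grid c.1 c.2 < pvMatGet grid d.1 d.2) = ∅ := by
      apply Finset.eq_empty_of_forall_notMem
      intro d hdm
      have hm := Finset.mem_filter.mp hdm
      have : d ∈ (pvCellS m n).filter (fun d =>
          pvMatGet grid c.1 c.2 < pvMatGet grid d.1 d.2) :=
        Finset.mem_filter.mpr ⟨hm.1, hm.2.2⟩
      rw [hempty] at this
      cases this
    rw [pvGz_rec, hemp2]
    rw [Finset.sum_range_succ']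
    have hz : ∀ k ∈ Finset.range ((pvCellS m n).card), pvBseq grid m n (k + 1) c = 0 := by
      intro k _
      rw [pvBseq, hemp2, Finset.sum_empty]
    rw [Finset.sum_congr rfl hz]
    simp [pvBseq]
  | succ r ih =>
    intro c hr
    have hsum : ∀ d ∈ (pvCellS m n).filter (fun d =>
        d ∈ pvNbr c ∧ pvMatGet grid c.1 c.2 < pvMatGet grid d.1 d.2),
        ((pvG grid m n d : Int) : ZMod 1000000007) =
          ∑ k ∈ Finset.range ((pvCellS m n).card + 1), pvBseq grid m n k d := by
      intro d hdm
      have hm := Finset.mem_filter.mp hdm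
      have hlt := pvRkU_lt grid m n hm.1 hm.2.2
      have hrc : pvRkU grid m n c ≤ r + 1 := hr
      exact ih d (by omega)
    have hinner : ∀ d ∈ (pvCellS m n).filter (fun d =>
        d ∈ pvNbr c ∧ pvMatGet grid c.1 c.2 < pvMatGet grid d.1 d.2),
        ∑ k ∈ Finset.range ((pvCellS m n).card + 1), pvBseq grid m n k d =
          ∑ k ∈ Finset.range ((pvCellS m n).card), pvBseq grid m n k d := by
      intro d hdm
      have hm := Finset.mem_filter.mp hdm
      rw [Finset.sum_range_succ]
      have hvan : pvBseq grid m n ((pvCellS m n).card) d = 0 := by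
        apply pvBseq_vanish
        have h1 := pvRkU_lt grid m n hm.1 hm.2.2
        have h2 := pvRkU_le grid m n c
        omega
      rw [hvan, add_zero]
    calc ((pvG grid m n c : Int) : ZMod 1000000007)
        = 1 + ∑ d ∈ (pvCellS m n).filter (fun d =>
            d ∈ pvNbr c ∧ pvMatGet grid c.1 c.2 < pvMatGet grid d.1 d.2),
              ((pvG grid m n d : Int) : ZMod 1000000007) := pvGz_rec grid m n c
      _ = 1 + ∑ d ∈ (pvCellS m n).filter (fun d =>
            d ∈ pvNbr c ∧ pvMatGet grid c.1 c.2 < pvMatGet grid d.1 d.2),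
              ∑ k ∈ Finset.range ((pvCellS m n).card), pvBseq grid m n k d := by
          rw [Finset.sum_congr rfl (fun d hd => (hsum d hd).trans (hinner d hd))]
      _ = 1 + ∑ k ∈ Finset.range ((pvCellS m n).card), ∑ d ∈ (pvCellS m n).filter (fun d =>
            d ∈ pvNbr c ∧ pvMatGet grid c.1 c.2 < pvMatGet grid d.1 d.2),
              pvBseq grid m n k d := by rw [Finset.sum_comm]
      _ = 1 + ∑ k ∈ Finset.range ((pvCellS m n).card), pvBseq grid m n (k + 1) c := by
          simp only [pvBseq]
      _ = ∑ k ∈ Finset.range ((pvCellS m n).card + 1), pvBseq grid m n k c := by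
          rw [Finset.sum_range_succ' (fun k => pvBseq grid m n k c) ((pvCellS m n).card)]
          have h0 : pvBseq grid m n 0 c = 1 := rfl
          rw [h0]
          ring

-- the transpose swap: one step of path extension moved from the A side to the B side
lemma pvSwap (grid : List (List Int)) (m n : Int) (i j : ℕ) :
    ∑ c ∈ pvCellS m n, pvAseq grid m n (i + 1) c * pvBseq grid m n j c =
      ∑ c ∈ pvCellS m n, pvAseq grid m n i c * pvBseq grid m n (j + 1) c := by
  have hL : ∀ c, pvAseq grid m n (i + 1) c * pvBseq grid m n j c =
      ∑ d ∈ pvCellS m n, if d ∈ pvNbr c ∧ pvMatGet grid d.1 d.2 < pvMatGet grid c.1 c.2 then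
        pvAseq grid m n i d * pvBseq grid m n j c else 0 := by
    intro c
    rw [pvAseq, Finset.sum_mul, Finset.sum_filter]
  have hR : ∀ c, pvAseq grid m n i c * pvBseq grid m n (j + 1) c =
      ∑ d ∈ pvCellS m n, if d ∈ pvNbr c ∧ pvMatGet grid c.1 c.2 < pvMatGet grid d.1 d.2 then
        pvAseq grid m n i c * pvBseq grid m n j d else 0 := by
    intro c
    rw [pvBseq, Finset.mul_sum, Finset.sum_filter]
  rw [Finset.sum_congr rfl (fun c _ => hL c), Finset.sum_congr rfl (fun c _ => hR c)]
  rw [Finset.sum_comm]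
  apply Finset.sum_congr rfl
  intro c _
  apply Finset.sum_congr rfl
  intro d _
  by_cases h : c ∈ pvNbr d ∧ pvMatGet grid c.1 c.2 < pvMatGet grid d.1 d.2
  · rw [if_pos h, if_pos ⟨(pvNbr_comm d c).mp h.1, h.2⟩]
  · rw [if_neg h, if_neg (fun hh => h ⟨(pvNbr_comm c d).mp hh.1, hh.2⟩)]

lemma pvShift (grid : List (List Int)) (m n : Int) :
    ∀ (j i : ℕ),
      ∑ c ∈ pvCellS m n, pvAseq grid m n i c * pvBseq grid m n j c =
        ∑ c ∈ pvCellS m n, pvAseq grid m n (i + j) c * pvBseq grid m n 0 c := by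
  intro j
  induction j with
  | zero => intro i; rfl
  | succ j ih =>
    intro i
    have h1 : ∑ c ∈ pvCellS m n, pvAseq grid m n i c * pvBseq grid m n (j + 1) c =
        ∑ c ∈ pvCellS m n, pvAseq grid m n (i + 1) c * pvBseq grid m n j c :=
      (pvSwap grid m n i j).symm
    rw [h1, ih (i + 1)]
    have hn : i + 1 + j = i + (j + 1) := by omega
    rw [hn]

lemma pvAB_sum (grid : List (List Int)) (m n : Int) (k : ℕ) :
    ∑ c ∈ pvCellS m n, pvAseq grid m n k c = ∑ c ∈ pvCellS m n, pvBseq grid m n k c := by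
  have h1 : ∑ c ∈ pvCellS m n, pvAseq grid m n 0 c * pvBseq grid m n k c =
      ∑ c ∈ pvCellS m n, pvAseq grid m n (0 + k) c * pvBseq grid m n 0 c :=
    pvShift grid m n k 0
  have hA0 : ∀ c, pvAseq grid m n 0 c = 1 := fun c => rfl
  have hB0 : ∀ c, pvBseq grid m n 0 c = 1 := fun c => rfl
  calc ∑ c ∈ pvCellS m n, pvAseq grid m n k c
      = ∑ c ∈ pvCellS m n, pvAseq grid m n (0 + k) c * pvBseq grid m n 0 c := by
        apply Finset.sum_congr rfl
        intro c _
        rw [hB0, mul_one, Nat.zero_add]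
    _ = ∑ c ∈ pvCellS m n, pvAseq grid m n 0 c * pvBseq grid m n k c := h1.symm
    _ = ∑ c ∈ pvCellS m n, pvBseq grid m n k c := by
        apply Finset.sum_congr rfl
        intro c _
        rw [hA0, one_mul]

lemma pvSum_FG (grid : List (List Int)) (m n : Int) :
    (((pvCoordsMN m n).map (pvF grid m n)).sum : ZMod 1000000007)
      = (((pvCoordsMN m n).map (pvG grid m n)).sum : ZMod 1000000007) := by
  rw [Int.cast_list_sum, Int.cast_list_sum, List.map_map, List.map_map]
  simp only [Function.comp_def]
  rw [pvList_finset_sum (pvCoordsMN_nodup m n) (fun c => ((pvF grid m n c : Int) : ZMod 1000000007)),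
    pvList_finset_sum (pvCoordsMN_nodup m n) (fun c => ((pvG grid m n c : Int) : ZMod 1000000007))]
  calc ∑ c ∈ (pvCoordsMN m n).toFinset, ((pvF grid m n c : Int) : ZMod 1000000007)
      = ∑ c ∈ pvCellS m n, ∑ k ∈ Finset.range ((pvCellS m n).card + 1),
          pvAseq grid m n k c := by
        apply Finset.sum_congr rfl
        intro c _
        exact pvFz_T grid m n (pvRkD grid m n c) c le_rfl
    _ = ∑ k ∈ Finset.range ((pvCellS m n).card + 1), ∑ c ∈ pvCellS m n,
          pvAseq grid m n k c := Finset.sum_comm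
    _ = ∑ k ∈ Finset.range ((pvCellS m n).card + 1), ∑ c ∈ pvCellS m n,
          pvBseq grid m n k c := by
        apply Finset.sum_congr rfl
        intro k _
        exact pvAB_sum grid m n k
    _ = ∑ c ∈ pvCellS m n, ∑ k ∈ Finset.range ((pvCellS m n).card + 1),
          pvBseq grid m n k c := Finset.sum_comm
    _ = ∑ c ∈ (pvCoordsMN m n).toFinset, ((pvG grid m n c : Int) : ZMod 1000000007) := by
        apply Finset.sum_congr rfl
        intro c _
        exact (pvGz_T grid m n (pvRkU grid m n c) c le_rfl).symm

lemma pvModEq {a b : Int}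
    (h : (a : ZMod 1000000007) = (b : ZMod 1000000007)) :
    PySem.Int.mod a 1000000007 = PySem.Int.mod b 1000000007 := by
  rw [PySem.Int.mod_eq_emod_of_pos (by norm_num), PySem.Int.mod_eq_emod_of_pos (by norm_num)]
  exact (ZMod.intCast_eq_intCast_iff _ _ _).mp h

-- ===== VERDICT (by name: the statement is the Claim_ definition above) =====
theorem countPaths_spec : Claim_equal_countPaths := by
  unfold Claim_equal_countPaths
  intro grid _ _
  unfold Spec_countPaths
  rw [pvA_sum, pvB_sum]
  exact pvModEq (pvSum_FG grid (pvM grid) (pvN grid))
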